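-- pv_equiv track=rewrite | github.com/GitMonsters/octotetrahedral-agi | arc-puzzle-catalog/re-arc/solves/3b4c1a4b/solver.py | transform
-- ===== SOURCE A (Python) =====
-- def transform(grid):
--     import copy
--     grid = [list(row) for row in grid]
--     rows = len(grid)
--     cols = len(grid[0])
--
--     # Find background color (most common) and line color
--     from collections import Counter
--     all_colors = [c for row in grid for c in row]
--     color_counts = Counter(all_colors)
--     bg_color = color_counts.most_common(1)[0][0]
--
--     # Line color is the second most common
--     line_color = None
--     for color, count in color_counts.most_common():
--         if color != bg_color:
--             line_color = color
--             break
--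
--     if line_color is None:
--         return grid
--
--     result = copy.deepcopy(grid)
--
--     # Find bounded rectangular regions and fill interiors
--     # Strategy: For each cell that is bg_color, check if it's enclosed by line_color rectangle
--
--     filled = [[False] * cols for _ in range(rows)]
--
--     # Try all possible rectangles defined by line boundaries
--     for top in range(rows):
--         for left in range(cols):
--             if grid[top][left] != line_color:
--                 continue
--
--             for bottom in range(top + 2, rows):
--                 for right in range(left + 2, cols):
--                     if is_bounded_rectangle(grid, top, left, bottom, right, line_color, bg_color):
--                         # Fill interior with 8
--                         for r in range(top + 1, bottom):
--                             for c in range(left + 1, right):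
--                                 if grid[r][c] == bg_color:
--                                     result[r][c] = 8
--
--     return result
--
-- def is_bounded_rectangle(grid, top, left, bottom, right, line_color, bg_color):
--     """
--     Check if this is a valid bounded rectangle:
--     - All four corners must be line_color
--     - All four edges must be entirely line_color
--     - Interior must have at least one bg_color cell
--     """
--     rows = len(grid)
--     cols = len(grid[0])
--
--     if bottom >= rows or right >= cols:
--         return False
--
--     # Check all four corners
--     if grid[top][left] != line_color:
--         return False
--     if grid[top][right] != line_color:
--         return False
--     if grid[bottom][left] != line_color:
--         return False
--     if grid[bottom][right] != line_color:
--         return False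
--
--     # Check top edge - all must be line_color
--     for c in range(left, right + 1):
--         if grid[top][c] != line_color:
--             return False
--
--     # Check bottom edge
--     for c in range(left, right + 1):
--         if grid[bottom][c] != line_color:
--             return False
--
--     # Check left edge
--     for r in range(top, bottom + 1):
--         if grid[r][left] != line_color:
--             return False
--
--     # Check right edge
--     for r in range(top, bottom + 1):
--         if grid[r][right] != line_color:
--             return False
--
--     # Interior must have at least one background cell
--     has_bg = False
--     for r in range(top + 1, bottom):
--         for c in range(left + 1, right):
--             if grid[r][c] == bg_color:
--                 has_bg = True
--                 break
--         if has_bg: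
--             break
--
--     return has_bg
-- ===== SOURCE B (Python) =====
-- def transform(grid):
--     grid = [list(row) for row in grid]
--     rows = len(grid)
--     cols = len(grid[0])
--
--     from collections import Counter
--     counts = Counter(c for row in grid for c in row)
--     bg = counts.most_common(1)[0][0]
--     line = None
--     for c, _ in counts.most_common():
--         if c != bg:
--             line = c
--             break
--     if line is None:
--         return grid
--
--     from itertools import accumulate
--
--     # Prefix-count arrays: every border / interior test below is O(1).
--     # rp[r][k] = number of line cells in grid[r][0:k]
--     rp = [list(accumulate((1 if x == line else 0 for x in row[:cols]), initial=0))
--           for row in grid]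
--     # cp[c][k] = number of line cells in column c, rows [0:k)
--     cp = [list(accumulate((1 if grid[r][c] == line else 0 for r in range(rows)), initial=0))
--           for c in range(cols)]
--     # bp[p][k] = number of bg cells in grid[0:p] restricted to columns [0:k)
--     bgrow = [list(accumulate((1 if x == bg else 0 for x in row[:cols]), initial=0))
--              for row in grid]
--     bp = [[0] * (cols + 1)]
--     for row in bgrow:
--         bp.append([a + b for a, b in zip(bp[-1], row)])
--
--     # 2D difference array accumulating the union of all bounded interiors.
--     diff = [[0] * (cols + 1) for _ in range(rows + 1)]
--     for t in range(rows):
--         for b in range(t + 2, rows):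
--             for l in range(cols):
--                 for rr in range(l + 2, cols):
--                     if (rp[t][rr + 1] - rp[t][l] == rr - l + 1
--                             and rp[b][rr + 1] - rp[b][l] == rr - l + 1
--                             and cp[l][b + 1] - cp[l][t] == b - t + 1
--                             and cp[rr][b + 1] - cp[rr][t] == b - t + 1
--                             and bp[b][rr] - bp[t + 1][rr] - bp[b][l + 1] + bp[t + 1][l + 1] > 0):
--                         diff[t + 1][l + 1] += 1
--                         diff[t + 1][rr] -= 1
--                         diff[b][l + 1] -= 1
--                         diff[b][rr] += 1
--
--     # cover[p][q] = sum of diff[i][j] for i < p, j < q  (2D prefix sum of diff),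
--     # i.e. cover[r+1][c+1] = number of filled interiors containing cell (r, c).
--     rowacc = [list(accumulate(drow, initial=0)) for drow in diff]
--     cover = [[0] * (cols + 2)]
--     for ra in rowacc:
--         cover.append([a + b for a, b in zip(cover[-1], ra)])
--
--     return [[8 if v == bg and c < cols and cover[r + 1][c + 1] > 0 else v
--              for c, v in enumerate(row)]
--             for r, row in enumerate(grid)]
-- ===== Notes on version B (the rewrite author's own statement) =====
-- stated objective: alternative
-- what changed: B replaces A's per-rectangle rescans of all four borders and the interior (and its per-rectangle repainting of the result) by prefix sums - row, column and 2D background prefix-count arrays give each border/interior test in O(1) - and accumulates the union of the filled interiors in a 2D difference array whose prefix sum yields per-cell coverage in one final sweep.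
import Mathlib
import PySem

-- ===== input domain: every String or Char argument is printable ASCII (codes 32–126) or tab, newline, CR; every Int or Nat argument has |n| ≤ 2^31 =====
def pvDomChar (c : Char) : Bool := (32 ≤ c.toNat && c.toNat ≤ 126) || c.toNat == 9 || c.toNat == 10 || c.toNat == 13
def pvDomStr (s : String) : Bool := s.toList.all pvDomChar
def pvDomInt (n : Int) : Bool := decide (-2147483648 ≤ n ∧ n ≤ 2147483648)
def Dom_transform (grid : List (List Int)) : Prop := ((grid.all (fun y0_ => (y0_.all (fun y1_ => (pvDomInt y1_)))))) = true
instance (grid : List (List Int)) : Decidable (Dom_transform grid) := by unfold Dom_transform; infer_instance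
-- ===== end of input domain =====

-- B replaces A's per-rectangle rescans of the four borders and the interior (and its
-- per-rectangle repainting of the result) by precomputed row/column/2D prefix-count arrays
-- giving each border and interior test in O(1), and accumulates the union of the filled
-- interiors in a 2D difference array whose prefix sum yields per-cell coverage in one sweep
-- (objective: alternative algorithm, same exact values).

-- ===== PORT A =====

-- grid[r][c] (total form; only evaluated in range under Pre_)
def gcell (grid : List (List Int)) (r c : Int) : Int :=
  PySem.List.pyGetD (PySem.List.pyGetD grid r []) c 0

-- result[r][c] = v
def pvSetCell (res : List (List Int)) (r c : Int) (v : Int) : List (List Int) :=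
  PySem.List.pySetD res r (PySem.List.pySetD (PySem.List.pyGetD res r []) c v)

def is_bounded_rectangle (grid : List (List Int)) (top left bottom right line_color bg_color : Int) : Bool :=
  let rows : Int := PySem.List.len grid
  let cols : Int := PySem.List.len (PySem.List.pyGetD grid 0 [])
  if bottom ≥ rows || right ≥ cols then false
  else if gcell grid top left != line_color then false
  else if gcell grid top right != line_color then false
  else if gcell grid bottom left != line_color then false
  else if gcell grid bottom right != line_color then false
  else if !((PySem.List.pyRange left (right+1) 1).all (fun c => gcell grid top c == line_color)) then false
  else if !((PySem.List.pyRange left (right+1) 1).all (fun c => gcell grid bottom c == line_color)) then false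
  else if !((PySem.List.pyRange top (bottom+1) 1).all (fun r => gcell grid r left == line_color)) then false
  else if !((PySem.List.pyRange top (bottom+1) 1).all (fun r => gcell grid r right == line_color)) then false
  else (PySem.List.pyRange (top+1) bottom 1).any (fun r =>
         (PySem.List.pyRange (left+1) right 1).any (fun c => gcell grid r c == bg_color))

def transform (grid : List (List Int)) : List (List Int) :=
  let grid := grid.map (fun row => row)
  let rows : Int := PySem.List.len grid
  let cols : Int := PySem.List.len (PySem.List.pyGetD grid 0 [])
  let all_colors := grid.flatMap (fun row => row)
  let mc := PySem.List.sorted (PySem.Dict.counter all_colors).items (fun p => p.2) true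
  let bg_color := (PySem.List.pyGetD mc 0 (0, 0)).1
  let line_color := mc.foldl
    (fun acc p => match acc with
      | some l => some l
      | none => if p.1 ≠ bg_color then some p.1 else none) none
  match line_color with
  | none => grid
  | some lc =>
      (PySem.List.pyRange 0 rows 1).foldl (fun res top =>
        (PySem.List.pyRange 0 cols 1).foldl (fun res left =>
          if gcell grid top left != lc then res else
          (PySem.List.pyRange (top+2) rows 1).foldl (fun res bottom =>
            (PySem.List.pyRange (left+2) cols 1).foldl (fun res right =>
              if is_bounded_rectangle grid top left bottom right lc bg_color then
                (PySem.List.pyRange (top+1) bottom 1).foldl (fun res r =>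
                  (PySem.List.pyRange (left+1) right 1).foldl (fun res c =>
                    if gcell grid r c == bg_color then pvSetCell res r c 8 else res) res) res
              else res) res) res) res) grid

-- ===== PORT B =====

-- itertools.accumulate(xs, initial=0)
def pyAccum (xs : List Int) : List Int := List.scanl (fun a x => a + x) 0 xs

-- diff[i][j] += v  (Python's in-place increment on the 2D difference array)
def pvBump (d : List (List Int)) (i j v : Int) : List (List Int) :=
  PySem.List.pySetD d i (PySem.List.pySetD (PySem.List.pyGetD d i []) j
    (PySem.List.pyGetD (PySem.List.pyGetD d i []) j 0 + v))

def transform_alt (grid : List (List Int)) : List (List Int) :=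
  let grid := grid.map (fun row => row)
  let rows : Int := PySem.List.len grid
  let cols : Int := PySem.List.len (PySem.List.pyGetD grid 0 [])
  let mc := PySem.List.sorted (PySem.Dict.counter (grid.flatMap (fun row => row))).items (fun p => p.2) true
  let bg := (PySem.List.pyGetD mc 0 (0, 0)).1
  let line := mc.foldl
    (fun acc p => match acc with
      | some l => some l
      | none => if p.1 ≠ bg then some p.1 else none) none
  match line with
  | none => grid
  | some lc =>
      let rp := grid.map (fun row =>
        pyAccum ((PySem.List.slice row none (some cols)).map (fun x => if x == lc then (1:Int) else 0)))
      let cp := (PySem.List.pyRange 0 cols 1).map (fun c =>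
        pyAccum ((PySem.List.pyRange 0 rows 1).map (fun r => if gcell grid r c == lc then (1:Int) else 0)))
      let bgrow := grid.map (fun row =>
        pyAccum ((PySem.List.slice row none (some cols)).map (fun x => if x == bg then (1:Int) else 0)))
      let bp := List.scanl (fun acc row => List.zipWith (· + ·) acc row)
        (List.replicate (cols.toNat + 1) (0:Int)) bgrow
      let diff := (PySem.List.pyRange 0 rows 1).foldl (fun d t =>
        (PySem.List.pyRange (t+2) rows 1).foldl (fun d b =>
          (PySem.List.pyRange 0 cols 1).foldl (fun d l =>
            (PySem.List.pyRange (l+2) cols 1).foldl (fun d rr =>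
              if (gcell rp t (rr+1) - gcell rp t l == rr - l + 1)
                 && (gcell rp b (rr+1) - gcell rp b l == rr - l + 1)
                 && (gcell cp l (b+1) - gcell cp l t == b - t + 1)
                 && (gcell cp rr (b+1) - gcell cp rr t == b - t + 1)
                 && decide (0 < gcell bp b rr - gcell bp (t+1) rr - gcell bp b (l+1) + gcell bp (t+1) (l+1))
              then pvBump (pvBump (pvBump (pvBump d (t+1) (l+1) 1) (t+1) rr (-1)) b (l+1) (-1)) b rr 1
              else d) d) d) d)
        (List.replicate (rows.toNat + 1) (List.replicate (cols.toNat + 1) (0:Int)))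
      let rowacc := diff.map (fun drow => pyAccum drow)
      let cover := List.scanl (fun acc ra => List.zipWith (· + ·) acc ra)
        (List.replicate (cols.toNat + 2) (0:Int)) rowacc
      (PySem.List.enumerate grid).map (fun p =>
        (PySem.List.enumerate p.2).map (fun q =>
          if q.2 == bg && decide (q.1 < cols) && decide (0 < gcell cover (p.1 + 1) (q.1 + 1))
          then 8 else q.2))

-- ===== PRECONDITION & SPEC =====

-- Pre_ excludes exactly the inputs where the Python A raises: grids with no cell at all
-- (IndexError on most_common(1)[0]) and non-monochrome grids with some row shorter than the
-- first row (IndexError while scanning grid[top][left] over range(len(grid[0]))).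
def Pre_transform (grid : List (List Int)) : Prop :=
  grid.flatten ≠ [] ∧
  ((∀ x ∈ grid.flatten, x = grid.flatten.getD 0 0) ∨
   (∀ row ∈ grid, (grid.getD 0 []).length ≤ row.length))
instance (grid : List (List Int)) : Decidable (Pre_transform grid) := by
  unfold Pre_transform; infer_instance

def pvWitness_transform : List (List Int) := [[0,0,0,0],[0,4,4,4],[0,4,0,4],[0,4,4,4]]

def Spec_transform (grid : List (List Int)) (out : List (List Int)) : Prop := out = transform_alt grid
instance (grid : List (List Int)) (out : List (List Int)) : Decidable (Spec_transform grid out) := by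
  unfold Spec_transform; infer_instance

-- ===== CLAIM (what is proved, stated in full; the proofs are below) =====
def Claim_equal_transform : Prop :=
  ∀ (grid : List (List Int)), Dom_transform grid → Pre_transform grid → Spec_transform grid (transform grid)

-- ===== LEMMAS AND PROOFS =====

-- grid[i][j] with Nat indices (total getD form)
def gN (g : List (List Int)) (i j : Nat) : Int := (g.getD i []).getD j 0

-- the fill loops preserve the shape of the grid
def ShapeEq (g res : List (List Int)) : Prop :=
  res.length = g.length ∧ ∀ i : Nat, (res.getD i []).length = (g.getD i []).length

theorem gcell_eq_gN (g : List (List Int)) (r c : Int) (hr : 0 ≤ r) (hc : 0 ≤ c) :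
    gcell g r c = gN g r.toNat c.toNat := by
  simp only [gcell, gN, PySem.List.pyGetD, PySem.List.pyGet?_of_nonneg _ hr,
    PySem.List.pyGet?_of_nonneg _ hc, List.getD_eq_getElem?_getD]

theorem getD_set_eq {α : Type} (l : List α) (i j : Nat) (x : α) (d : α) :
    (l.set i x).getD j d = if j = i ∧ i < l.length then x else l.getD j d := by
  simp only [List.getD_eq_getElem?_getD, List.getElem?_set]
  split_ifs with h1 h2 h3 <;> simp_all

theorem setCell_char (g res : List (List Int)) (r c : Int) (hr : 0 ≤ r) (hc : 0 ≤ c)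
    (hs : ShapeEq g res) (hrN : r.toNat < g.length)
    (hcN : c.toNat < (g.getD r.toNat []).length) :
    ShapeEq g (pvSetCell res r c 8) ∧
      ∀ i j : Nat, gN (pvSetCell res r c 8) i j =
        if i = r.toNat ∧ j = c.toNat then 8 else gN res i j := by
  have hres : pvSetCell res r c 8 = res.set r.toNat ((res.getD r.toNat []).set c.toNat 8) := by
    simp only [pvSetCell, PySem.List.pySetD_of_nonneg _ _ hr, PySem.List.pySetD_of_nonneg _ _ hc,
      PySem.List.pyGetD, PySem.List.pyGet?_of_nonneg _ hr, List.getD_eq_getElem?_getD]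
  have hrlen : r.toNat < res.length := by rw [hs.1]; exact hrN
  have hclen : c.toNat < (res.getD r.toNat []).length := by rw [hs.2 r.toNat]; exact hcN
  rw [hres]
  refine ⟨⟨by simpa using hs.1, ?_⟩, ?_⟩
  · intro i
    rw [getD_set_eq]
    split_ifs with h
    · rw [List.length_set, h.1]; exact hs.2 r.toNat
    · exact hs.2 i
  · intro i j
    show ((res.set r.toNat ((res.getD r.toNat []).set c.toNat 8)).getD i []).getD j 0 = _
    rw [getD_set_eq]
    by_cases hi : i = r.toNat
    · rw [if_pos ⟨hi, hrlen⟩, getD_set_eq]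
      by_cases hj : j = c.toNat
      · rw [if_pos ⟨hj, hclen⟩, if_pos ⟨hi, hj⟩]
      · rw [if_neg (fun h => hj h.1), if_neg (fun h => hj h.2)]
        simp [gN, hi]
    · rw [if_neg (fun h => hi h.1), if_neg (fun h => hi h.1)]
      rfl

theorem foldl_fill_char {α : Type} (g : List (List Int)) (P : α → Nat → Nat → Bool) :
    ∀ (L : List α) (F : List (List Int) → α → List (List Int)),
      (∀ res a, a ∈ L → ShapeEq g res → ShapeEq g (F res a) ∧
        ∀ i j : Nat, gN (F res a) i j = if P a i j then 8 else gN res i j) →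
      ∀ res, ShapeEq g res → ShapeEq g (L.foldl F res) ∧
        ∀ i j : Nat, gN (L.foldl F res) i j =
          if L.any (fun a => P a i j) then 8 else gN res i j := by
  intro L
  induction L with
  | nil => intro F _ res hs; simpa using hs
  | cons x L ih =>
      intro F hF res hs
      have hx := hF res x (by simp) hs
      have hrest := ih F (fun res a ha hs => hF res a (by simp [ha]) hs) (F res x) hx.1
      refine ⟨hrest.1, ?_⟩
      intro i j
      rw [List.foldl_cons] at *
      rw [hrest.2 i j, hx.2 i j]
      by_cases h1 : P x i j = true <;> by_cases h2 : L.any (fun a => P a i j) = true <;>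
        simp [h1, h2]

-- the main quadruple loop of A, as a standalone term (exactly the some-branch of transform)
def AFold (g : List (List Int)) (lc bg : Int) : List (List Int) :=
  (PySem.List.pyRange 0 (PySem.List.len g) 1).foldl (fun res top =>
    (PySem.List.pyRange 0 (PySem.List.len (PySem.List.pyGetD g 0 [])) 1).foldl (fun res left =>
      if gcell g top left != lc then res else
      (PySem.List.pyRange (top+2) (PySem.List.len g) 1).foldl (fun res bottom =>
        (PySem.List.pyRange (left+2) (PySem.List.len (PySem.List.pyGetD g 0 [])) 1).foldl (fun res right =>
          if is_bounded_rectangle g top left bottom right lc bg then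
            (PySem.List.pyRange (top+1) bottom 1).foldl (fun res r =>
              (PySem.List.pyRange (left+1) right 1).foldl (fun res c =>
                if gcell g r c == bg then pvSetCell res r c 8 else res) res) res
          else res) res) res) res) g

-- "cell (i,j) is filled by A": some admissible rectangle passes is_bounded_rectangle and
-- strictly contains (i,j), and the cell holds the background colour
def CondA (g : List (List Int)) (lc bg : Int) (i j : Nat) : Bool :=
  (PySem.List.pyRange 0 (PySem.List.len g) 1).any (fun top =>
    (PySem.List.pyRange 0 (PySem.List.len (PySem.List.pyGetD g 0 [])) 1).any (fun left =>
      !(gcell g top left != lc) &&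
      (PySem.List.pyRange (top+2) (PySem.List.len g) 1).any (fun bottom =>
        (PySem.List.pyRange (left+2) (PySem.List.len (PySem.List.pyGetD g 0 [])) 1).any (fun right =>
          is_bounded_rectangle g top left bottom right lc bg &&
          (PySem.List.pyRange (top+1) bottom 1).any (fun r =>
            (PySem.List.pyRange (left+1) right 1).any (fun c =>
              decide (i = r.toNat ∧ j = c.toNat ∧ gN g i j = bg)))))))

theorem if_bool_congr {α : Type} (b1 b2 : Bool) (h : b1 = b2) (x y : α) :
    (if b1 then x else y) = (if b2 then x else y) := by rw [h]

theorem A_char (g : List (List Int)) (lc bg : Int)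
    (hrow : ∀ row ∈ g, (g.getD 0 []).length ≤ row.length) :
    ShapeEq g (AFold g lc bg) ∧
      ∀ i j : Nat, gN (AFold g lc bg) i j = if CondA g lc bg i j then 8 else gN g i j := by
  unfold AFold CondA
  refine foldl_fill_char g _ _ _ ?_ g ⟨rfl, fun _ => rfl⟩
  intro res top htop hs
  rw [PySem.List.mem_pyRange_one] at htop
  show ShapeEq g (List.foldl _ res _) ∧ _
  refine foldl_fill_char g _ _ _ ?_ res hs
  intro res left hleft hs
  rw [PySem.List.mem_pyRange_one] at hleft
  by_cases hg : (gcell g top left != lc) = true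
  · rw [if_pos hg]
    refine ⟨hs, fun i j => ?_⟩
    simp [hg]
  · rw [if_neg hg]
    have Hb := foldl_fill_char g
      (P := fun bottom i j =>
        (PySem.List.pyRange (left+2) (PySem.List.len (PySem.List.pyGetD g 0 [])) 1).any (fun right =>
          is_bounded_rectangle g top left bottom right lc bg &&
          (PySem.List.pyRange (top+1) bottom 1).any (fun r =>
            (PySem.List.pyRange (left+1) right 1).any (fun c =>
              decide (i = r.toNat ∧ j = c.toNat ∧ gN g i j = bg)))))
      (PySem.List.pyRange (top+2) (PySem.List.len g) 1)
      (fun res bottom =>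
        (PySem.List.pyRange (left+2) (PySem.List.len (PySem.List.pyGetD g 0 [])) 1).foldl (fun res right =>
          if is_bounded_rectangle g top left bottom right lc bg then
            (PySem.List.pyRange (top+1) bottom 1).foldl (fun res r =>
              (PySem.List.pyRange (left+1) right 1).foldl (fun res c =>
                if gcell g r c == bg then pvSetCell res r c 8 else res) res) res
          else res) res)
      ?_ res hs
    · refine ⟨Hb.1, fun i j => ?_⟩
      rw [Hb.2 i j]
      exact (if_bool_congr _ _ (by simp [hg]) _ _).symm
    intro res bottom hbottom hs
    rw [PySem.List.mem_pyRange_one] at hbottom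
    refine foldl_fill_char g _ _ _ ?_ res hs
    intro res right hright hs
    rw [PySem.List.mem_pyRange_one] at hright
    by_cases hbd : is_bounded_rectangle g top left bottom right lc bg = true
    case neg =>
      rw [if_neg hbd]
      refine ⟨hs, fun i j => ?_⟩
      simp [hbd]
    · rw [if_pos hbd]
      have Hfr := foldl_fill_char g
        (P := fun r i j =>
          (PySem.List.pyRange (left+1) right 1).any (fun c =>
            decide (i = r.toNat ∧ j = c.toNat ∧ gN g i j = bg)))
        (PySem.List.pyRange (top+1) bottom 1)
        (fun res r =>
          (PySem.List.pyRange (left+1) right 1).foldl (fun res c =>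
            if gcell g r c == bg then pvSetCell res r c 8 else res) res)
        ?_ res hs
      · refine ⟨Hfr.1, fun i j => ?_⟩
        rw [Hfr.2 i j]
        exact (if_bool_congr _ _ (by simp [hbd]) _ _).symm
      intro res r hr hs
      rw [PySem.List.mem_pyRange_one] at hr
      refine foldl_fill_char g _ _ _ ?_ res hs
      intro res c hc hs
      rw [PySem.List.mem_pyRange_one] at hc
      have hR : (PySem.List.len g) = (g.length : Int) := by
        simp [PySem.List.len_eq]
      have hrN : r.toNat < g.length := by omega
      have hrowmem : g.getD r.toNat [] ∈ g := by
        rw [List.getD_eq_getElem _ _ hrN]; exact List.getElem_mem hrN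
      have hC : (PySem.List.len (PySem.List.pyGetD g 0 [])) ≤ ((g.getD r.toNat []).length : Int) := by
        have h1 := hrow _ hrowmem
        have h2 : PySem.List.pyGetD g 0 [] = g.getD 0 [] := by
          simp [PySem.List.pyGetD, PySem.List.pyGet?_zero, List.getD_eq_getElem?_getD]
        rw [h2, PySem.List.len_eq]
        exact_mod_cast h1
      have hcN : c.toNat < (g.getD r.toNat []).length := by omega
      have hr0 : (0:Int) ≤ r := by omega
      have hc0 : (0:Int) ≤ c := by omega
      by_cases hbg : (gcell g r c == bg) = true
      · rw [if_pos hbg]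
        have HS := setCell_char g res r c hr0 hc0 hs hrN hcN
        refine ⟨HS.1, fun i j => ?_⟩
        rw [HS.2 i j]
        have heqv : (i = r.toNat ∧ j = c.toNat) ↔ (i = r.toNat ∧ j = c.toNat ∧ gN g i j = bg) := by
          constructor
          · rintro ⟨hi, hj⟩
            refine ⟨hi, hj, ?_⟩
            rw [hi, hj, ← gcell_eq_gN g r c hr0 hc0]
            exact eq_of_beq hbg
          · rintro ⟨hi, hj, _⟩; exact ⟨hi, hj⟩
        by_cases hcase : i = r.toNat ∧ j = c.toNat
        · rw [if_pos hcase, if_pos (by simp only [decide_eq_true_eq]; exact heqv.mp hcase)]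
        · rw [if_neg hcase,
            if_neg (by simp only [decide_eq_true_eq]; exact fun h => hcase ⟨h.1, h.2.1⟩)]
      · rw [if_neg hbg]
        refine ⟨hs, fun i j => ?_⟩
        have hn : ¬ (i = r.toNat ∧ j = c.toNat ∧ gN g i j = bg) := by
          rintro ⟨hi, hj, hv⟩
          rw [hi, hj, ← gcell_eq_gN g r c hr0 hc0] at hv
          simp [hv] at hbg
        simp [hn]

theorem all_slice_iff (xs : List Int) (a b : Int) (p : Int → Bool) (h0 : 0 ≤ a) (h1 : 0 ≤ b)
    (hb : b ≤ (xs.length : Int)) :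
    ((PySem.List.slice xs (some a) (some b)).all p = true) ↔
      ∀ x : Int, a ≤ x → x < b → p (PySem.List.pyGetD xs x 0) = true := by
  rw [PySem.List.slice_toNat xs h0 h1, List.all_eq_true]
  constructor
  · intro H x hax hxb
    have hx0 : 0 ≤ x := le_trans h0 hax
    have hxlen : x.toNat < xs.length := by omega
    have hk2 : x.toNat - a.toNat < (List.take (b.toNat - a.toNat) (List.drop a.toNat xs)).length := by
      simp only [List.length_take, List.length_drop]
      omega
    have hmem : (List.take (b.toNat - a.toNat) (List.drop a.toNat xs))[x.toNat - a.toNat]'hk2 ∈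
        List.take (b.toNat - a.toNat) (List.drop a.toNat xs) := List.getElem_mem hk2
    have hval : (List.take (b.toNat - a.toNat) (List.drop a.toNat xs))[x.toNat - a.toNat]'hk2 = xs[x.toNat]'hxlen := by
      rw [List.getElem_take, List.getElem_drop]
      congr 1
      omega
    have h := H _ hmem
    rw [hval] at h
    rwa [PySem.List.pyGetD_eq_getElem xs 0 hx0 (by push_cast; omega)]
  · intro H e he
    obtain ⟨k, hk, rfl⟩ := List.mem_iff_getElem.mp he
    have hklen := hk
    simp only [List.length_take, List.length_drop] at hklen
    have hk2 : a.toNat + k < xs.length := by omega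
    have hval : (List.take (b.toNat - a.toNat) (List.drop a.toNat xs))[k]'hk = xs[a.toNat + k]'hk2 := by
      rw [List.getElem_take, List.getElem_drop]
    rw [hval]
    have hx := H (a + k) (by omega) (by omega)
    rw [PySem.List.pyGetD_eq_getElem xs 0 (by omega) (by push_cast; omega)] at hx
    have hidx : xs[a.toNat + k]'hk2 = xs[(a + (k:Int)).toNat]'(by omega) := by
      congr 1
      omega
    rw [hidx]
    exact hx

theorem any_slice_iff (xs : List Int) (a b : Int) (p : Int → Bool) (h0 : 0 ≤ a) (h1 : 0 ≤ b)
    (hb : b ≤ (xs.length : Int)) :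
    ((PySem.List.slice xs (some a) (some b)).any p = true) ↔
      ∃ x : Int, a ≤ x ∧ x < b ∧ p (PySem.List.pyGetD xs x 0) = true := by
  rw [PySem.List.slice_toNat xs h0 h1, List.any_eq_true]
  constructor
  · rintro ⟨e, he, hp⟩
    obtain ⟨k, hk, rfl⟩ := List.mem_iff_getElem.mp he
    have hklen := hk
    simp only [List.length_take, List.length_drop] at hklen
    have hk2 : a.toNat + k < xs.length := by omega
    have hval : (List.take (b.toNat - a.toNat) (List.drop a.toNat xs))[k]'hk = xs[a.toNat + k]'hk2 := by
      rw [List.getElem_take, List.getElem_drop]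
    rw [hval] at hp
    refine ⟨a + k, by omega, by omega, ?_⟩
    rw [PySem.List.pyGetD_eq_getElem xs 0 (by omega) (by omega)]
    have hidx : xs[(a + (k:Int)).toNat]'(by omega) = xs[a.toNat + k]'hk2 := by
      congr 1
      omega
    rw [hidx]
    exact hp
  · rintro ⟨x, hax, hxb, hp⟩
    have hx0 : 0 ≤ x := le_trans h0 hax
    have hxlen : x.toNat < xs.length := by omega
    have hk2 : x.toNat - a.toNat < (List.take (b.toNat - a.toNat) (List.drop a.toNat xs)).length := by
      simp only [List.length_take, List.length_drop]
      omega
    refine ⟨_, List.getElem_mem hk2, ?_⟩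
    have hval : (List.take (b.toNat - a.toNat) (List.drop a.toNat xs))[x.toNat - a.toNat]'hk2 = xs[x.toNat]'hxlen := by
      rw [List.getElem_take, List.getElem_drop]
      congr 1
      omega
    rw [hval]
    rwa [PySem.List.pyGetD_eq_getElem xs 0 hx0 (by omega)] at hp

-- the common reading of both border tests
def EdgesBg (g : List (List Int)) (lc bg t l b rr : Int) : Prop :=
  (∀ x : Int, l ≤ x → x ≤ rr → gcell g t x = lc) ∧
  (∀ x : Int, l ≤ x → x ≤ rr → gcell g b x = lc) ∧
  (∀ x : Int, t ≤ x → x ≤ b → gcell g x l = lc) ∧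
  (∀ x : Int, t ≤ x → x ≤ b → gcell g x rr = lc) ∧
  (∃ x y : Int, t < x ∧ x < b ∧ l < y ∧ y < rr ∧ gcell g x y = bg)

theorem isbdd_iff_edges (g : List (List Int)) (lc bg t l b rr : Int)
    (hb : t + 2 ≤ b ∧ b < PySem.List.len g)
    (hrr : l + 2 ≤ rr ∧ rr < PySem.List.len (PySem.List.pyGetD g 0 [])) :
    (is_bounded_rectangle g t l b rr lc bg = true) ↔ EdgesBg g lc bg t l b rr := by
  unfold is_bounded_rectangle EdgesBg
  rw [if_neg (by simp only [Bool.or_eq_true, decide_eq_true_eq]; omega)]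
  constructor
  · intro H
    split_ifs at H with h1 h2 h3 h4 h5 h6 h7 h8
    simp only [Bool.not_eq_true, Bool.not_eq_false'] at h5 h6 h7 h8
    rw [List.all_eq_true] at h5 h6 h7 h8
    rw [List.any_eq_true] at H
    refine ⟨?_, ?_, ?_, ?_, ?_⟩
    · intro x hx1 hx2
      have := h5 x (by rw [PySem.List.mem_pyRange_one]; omega)
      simpa using this
    · intro x hx1 hx2
      have := h6 x (by rw [PySem.List.mem_pyRange_one]; omega)
      simpa using this
    · intro x hx1 hx2
      have := h7 x (by rw [PySem.List.mem_pyRange_one]; omega)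
      simpa using this
    · intro x hx1 hx2
      have := h8 x (by rw [PySem.List.mem_pyRange_one]; omega)
      simpa using this
    · obtain ⟨x, hx, hpx⟩ := H
      rw [List.any_eq_true] at hpx
      obtain ⟨y, hy, hpy⟩ := hpx
      rw [PySem.List.mem_pyRange_one] at hx hy
      exact ⟨x, y, by omega, by omega, by omega, by omega, by simpa using hpy⟩
  · rintro ⟨e1, e2, e3, e4, x, y, hx1, hx2, hy1, hy2, hxy⟩
    have a1 : (PySem.List.pyRange l (rr+1) 1).all (fun c => gcell g t c == lc) = true := by
      rw [List.all_eq_true]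
      intro c hc
      rw [PySem.List.mem_pyRange_one] at hc
      simpa using e1 c (by omega) (by omega)
    have a2 : (PySem.List.pyRange l (rr+1) 1).all (fun c => gcell g b c == lc) = true := by
      rw [List.all_eq_true]
      intro c hc
      rw [PySem.List.mem_pyRange_one] at hc
      simpa using e2 c (by omega) (by omega)
    have a3 : (PySem.List.pyRange t (b+1) 1).all (fun r => gcell g r l == lc) = true := by
      rw [List.all_eq_true]
      intro r hr
      rw [PySem.List.mem_pyRange_one] at hr
      simpa using e3 r (by omega) (by omega)
    have a4 : (PySem.List.pyRange t (b+1) 1).all (fun r => gcell g r rr == lc) = true := by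
      rw [List.all_eq_true]
      intro r hr
      rw [PySem.List.mem_pyRange_one] at hr
      simpa using e4 r (by omega) (by omega)
    have c1 : gcell g t l = lc := e1 l le_rfl (by omega)
    have c2 : gcell g t rr = lc := e1 rr (by omega) le_rfl
    have c3 : gcell g b l = lc := e2 l le_rfl (by omega)
    have c4 : gcell g b rr = lc := e2 rr (by omega) le_rfl
    rw [if_neg (by simp [c1]), if_neg (by simp [c2]), if_neg (by simp [c3]), if_neg (by simp [c4]),
      if_neg (by simp [a1]), if_neg (by simp [a2]), if_neg (by simp [a3]), if_neg (by simp [a4])]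
    rw [List.any_eq_true]
    refine ⟨x, by rw [PySem.List.mem_pyRange_one]; omega, ?_⟩
    rw [List.any_eq_true]
    exact ⟨y, by rw [PySem.List.mem_pyRange_one]; omega, by simpa using hxy⟩

theorem foldl_break_some (mc : List (Int × Int)) (bg : Int) (l : Int) :
    mc.foldl (fun acc p => match acc with
      | some l => some l
      | none => if p.1 ≠ bg then some p.1 else none) (some l) = some l := by
  induction mc with
  | nil => rfl
  | cons x mc ih => simpa using ih

theorem foldl_break_find (mc : List (Int × Int)) (bg : Int) :
    mc.foldl (fun acc p => match acc with
      | some l => some l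
      | none => if p.1 ≠ bg then some p.1 else none) none
    = (mc.find? (fun p => p.1 != bg)).map (fun p => p.1) := by
  induction mc with
  | nil => rfl
  | cons x mc ih =>
      rw [List.foldl_cons, List.find?_cons]
      by_cases hx : x.1 = bg
      · have h1 : (x.1 != bg) = false := by simp [hx]
        rw [h1]
        simpa [hx] using ih
      · have h1 : (x.1 != bg) = true := by simp [hx]
        rw [h1]
        show List.foldl _ (if x.1 ≠ bg then some x.1 else none) mc = _
        rw [if_pos hx]
        rw [foldl_break_some]
        rfl

theorem len_pyGetD_zero (g : List (List Int)) :
    PySem.List.len (PySem.List.pyGetD g 0 []) = ((g.getD 0 []).length : Int) := by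
  have h2 : PySem.List.pyGetD g 0 [] = g.getD 0 [] := by
    simp [PySem.List.pyGetD, PySem.List.pyGet?_zero, List.getD_eq_getElem?_getD]
  rw [h2, PySem.List.len_eq]

theorem mono_find_none (g : List (List Int)) (hne : g.flatten ≠ [])
    (hmono : ∀ x ∈ g.flatten, x = g.flatten.getD 0 0) :
    (PySem.List.sorted (PySem.Dict.counter (g.flatMap fun row => row)).items (fun p => p.2) true).find?
      (fun p => p.1 != (PySem.List.pyGetD
        (PySem.List.sorted (PySem.Dict.counter (g.flatMap fun row => row)).items (fun p => p.2) true)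
        0 ((0:Int), (0:Int))).1) = none := by
  have hF : (g.flatMap fun row => row) = g.flatten := List.flatMap_id'
  have hkeys : ∀ p ∈ (PySem.List.sorted (PySem.Dict.counter (g.flatMap fun row => row)).items
      (fun p => p.2) true), p.1 ∈ g.flatten := by
    intro p hp
    have hp2 := (PySem.List.sorted_perm _ _ _).mem_iff.mp hp
    rw [PySem.Dict.items_counter] at hp2
    obtain ⟨k, hk, rfl⟩ := List.mem_map.mp hp2
    rw [hF] at hk
    exact (PySem.Set.mem_ofList _ _).mp hk
  have hmcne : (PySem.List.sorted (PySem.Dict.counter (g.flatMap fun row => row)).items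
      (fun p => p.2) true) ≠ [] := by
    rw [Ne, PySem.List.sorted_eq_nil_iff]
    intro hitems
    rw [PySem.Dict.items_counter] at hitems
    obtain ⟨x, hx⟩ := List.exists_mem_of_ne_nil _ hne
    rw [← hF] at hx
    have : x ∈ PySem.Set.ofList (g.flatMap fun row => row) := (PySem.Set.mem_ofList _ _).mpr hx
    have := List.mem_map_of_mem (f := fun k => (k, ((g.flatMap fun row => row).count k : Int))) this
    rw [hitems] at this
    exact absurd this (List.not_mem_nil)
  apply List.find?_eq_none.mpr
  intro p hp
  obtain ⟨p0, mc', hmc⟩ := List.exists_cons_of_ne_nil hmcne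
  have hbg : (PySem.List.pyGetD
      (PySem.List.sorted (PySem.Dict.counter (g.flatMap fun row => row)).items (fun p => p.2) true)
      0 ((0:Int), (0:Int))).1 = p0.1 := by
    rw [hmc, PySem.List.pyGetD_zero_cons]
  have hp1 : p.1 = g.flatten.getD 0 0 := hmono _ (hkeys p hp)
  have hp0 : p0.1 = g.flatten.getD 0 0 := hmono _ (hkeys p0 (by rw [hmc]; exact List.mem_cons_self))
  rw [hbg]
  simp [hp1, hp0]

theorem getElem2_eq_gN (xs : List (List Int)) (i j : Nat) (h1 : i < xs.length)
    (h2 : j < (xs[i]'h1).length) : (xs[i]'h1)[j]'h2 = gN xs i j := by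
  rw [gN, List.getD_eq_getElem _ _ h1, List.getD_eq_getElem _ _ h2]

-- ======================= B-side lemmas =======================

theorem scanl_add_getD (xs : List Int) : ∀ (a : Int) (k : Nat), k ≤ xs.length →
    (List.scanl (fun s x => s + x) a xs).getD k 0 = a + (xs.take k).sum := by
  induction xs with
  | nil =>
      intro a k hk
      have : k = 0 := by simpa using hk
      subst this; simp
  | cons x xs ih =>
      intro a k hk
      cases k with
      | zero => simp
      | succ k =>
          rw [List.scanl_cons]
          show (List.scanl _ (a + x) xs).getD k 0 = _
          rw [ih (a + x) k (by simpa using hk)]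
          simp [add_assoc]

theorem pyAccum_getD (xs : List Int) (k : Nat) (hk : k ≤ xs.length) :
    (pyAccum xs).getD k 0 = (xs.take k).sum := by
  rw [pyAccum, scanl_add_getD xs 0 k hk, zero_add]

theorem length_pyAccum (xs : List Int) : (pyAccum xs).length = xs.length + 1 :=
  List.length_scanl ..

theorem take_sum_sub (xs : List Int) (k1 k2 : Nat) (h : k1 ≤ k2) :
    (xs.take k2).sum - (xs.take k1).sum = ((xs.drop k1).take (k2 - k1)).sum := by
  have : xs.take k2 = xs.take k1 ++ (xs.drop k1).take (k2 - k1) := by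
    rw [← List.take_add]
    congr 1
    omega
  rw [this, List.sum_append]
  ring

-- indicator sums
theorem sum_map_ind_nonneg (ys : List Int) (p : Int → Bool) :
    0 ≤ (ys.map (fun x => if p x then (1:Int) else 0)).sum := by
  induction ys with
  | nil => simp
  | cons y ys ih => by_cases h : p y <;> simp [h] <;> omega

theorem sum_map_ind_le (ys : List Int) (p : Int → Bool) :
    (ys.map (fun x => if p x then (1:Int) else 0)).sum ≤ (ys.length : Int) := by
  induction ys with
  | nil => simp
  | cons y ys ih => by_cases h : p y <;> simp [h] <;> push_cast <;> omega

theorem sum_map_ind_eq_len_iff (ys : List Int) (p : Int → Bool) :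
    (ys.map (fun x => if p x then (1:Int) else 0)).sum = (ys.length : Int) ↔
      ∀ y ∈ ys, p y = true := by
  induction ys with
  | nil => simp
  | cons y ys ih =>
      have hle := sum_map_ind_le ys p
      simp only [List.map_cons, List.sum_cons, List.length_cons, List.mem_cons]
      push_cast
      by_cases h : p y
      · rw [if_pos h]
        constructor
        · intro he z hz
          rcases hz with rfl | hz
          · exact h
          · exact (ih.mp (by omega)) z hz
        · intro hall
          have := ih.mpr (fun z hz => hall z (Or.inr hz))
          omega
      · rw [if_neg h]
        constructor
        · intro he
          omega
        · intro hall
          exact absurd (hall y (Or.inl rfl)) h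

theorem sum_map_ind_pos_iff (ys : List Int) (p : Int → Bool) :
    0 < (ys.map (fun x => if p x then (1:Int) else 0)).sum ↔ ∃ y ∈ ys, p y = true := by
  induction ys with
  | nil => simp
  | cons y ys ih =>
      have hnn := sum_map_ind_nonneg ys p
      by_cases h : p y <;> simp [h, ih] <;> omega

theorem sum_map_nonneg {α : Type} (L : List α) (f : α → Int) (h : ∀ a ∈ L, 0 ≤ f a) :
    0 ≤ (L.map f).sum := by
  induction L with
  | nil => simp
  | cons x L ih =>
      simp only [List.map_cons, List.sum_cons]
      have := h x (by simp)
      have := ih (fun a ha => h a (by simp [ha]))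
      omega

theorem sum_map_pos_iff {α : Type} (L : List α) (f : α → Int) (h : ∀ a ∈ L, 0 ≤ f a) :
    0 < (L.map f).sum ↔ ∃ a ∈ L, 0 < f a := by
  induction L with
  | nil => simp
  | cons x L ih =>
      simp only [List.map_cons, List.sum_cons, List.mem_cons]
      have h1 := h x (by simp)
      have h2 := sum_map_nonneg L f (fun a ha => h a (by simp [ha]))
      constructor
      · intro hp
        by_cases hx : 0 < f x
        · exact ⟨x, Or.inl rfl, hx⟩
        · obtain ⟨a, ha, hfa⟩ := (ih (fun a ha => h a (by simp [ha]))).mp (by omega)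
          exact ⟨a, Or.inr ha, hfa⟩
      · rintro ⟨a, (rfl | ha), hfa⟩
        · omega
        · have := (ih (fun a ha => h a (by simp [ha]))).mpr ⟨a, ha, hfa⟩
          omega

theorem sum_map_sub {α : Type} (L : List α) (f g : α → Int) :
    (L.map f).sum - (L.map g).sum = (L.map (fun x => f x - g x)).sum := by
  induction L with
  | nil => simp
  | cons x L ih => simp only [List.map_cons, List.sum_cons]; omega

theorem zipWith_add_getD (a b : List Int) (h : a.length = b.length) (q : Nat) :
    (List.zipWith (· + ·) a b).getD q 0 = a.getD q 0 + b.getD q 0 := by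
  induction a generalizing b q with
  | nil => cases b with
    | nil => simp
    | cons y ys => simp at h
  | cons x xs ih =>
      cases b with
      | nil => simp at h
      | cons y ys =>
          cases q with
          | zero => simp
          | succ q => simpa using ih ys (by simpa using h) q

theorem length_zipWith_add (a b : List Int) (h : a.length = b.length) :
    (List.zipWith (· + ·) a b).length = a.length := by
  rw [List.length_zipWith]; omega

theorem scanl_zip_getD : ∀ (rs : List (List Int)) (z : List Int),
    (∀ r ∈ rs, r.length = z.length) →
    ∀ (p : Nat), p ≤ rs.length → ∀ (q : Nat),
    ((List.scanl (fun acc row => List.zipWith (· + ·) acc row) z rs).getD p []).getD q 0 =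
      z.getD q 0 + ((rs.take p).map (fun r => r.getD q 0)).sum := by
  intro rs
  induction rs with
  | nil =>
      intro z _ p hp q
      have : p = 0 := by simpa using hp
      subst this; simp
  | cons r rs ih =>
      intro z hlen p hp q
      cases p with
      | zero => simp
      | succ p =>
          rw [List.scanl_cons]
          show ((List.scanl _ (List.zipWith (· + ·) z r) rs).getD p []).getD q 0 = _
          have hzr : (List.zipWith (· + ·) z r).length = z.length :=
            length_zipWith_add z r (hlen r (by simp)).symm
          rw [ih (List.zipWith (· + ·) z r)
            (fun r' hr' => by rw [hzr]; exact hlen r' (by simp [hr']))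
            p (by simpa using hp) q]
          rw [zipWith_add_getD z r (hlen r (by simp)).symm]
          simp [add_assoc]

theorem sum_take_set : ∀ (l : List Int) (i k : Nat) (x : Int),
    ((l.set i x).take k).sum = (l.take k).sum +
      (if i < k ∧ i < l.length then x - l.getD i 0 else 0) := by
  intro l
  induction l with
  | nil => intro i k x; simp
  | cons a l ih =>
      intro i k x
      cases k with
      | zero => simp
      | succ k =>
          cases i with
          | zero =>
              simp only [List.set_cons_zero, List.take_succ_cons, List.sum_cons, List.getD_cons_zero,
                List.length_cons]
              rw [if_pos ⟨by omega, by omega⟩]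
              ring
          | succ i =>
              rw [List.set_cons_succ]
              simp only [List.take_succ_cons, List.sum_cons, List.getD_cons_succ, List.length_cons]
              rw [ih i k x]
              by_cases h : i < k ∧ i < l.length
              · rw [if_pos h, if_pos ⟨by omega, by omega⟩]
                ring
              · rw [if_neg h, if_neg (by omega)]
                ring

-- region sum: sum of d[i][j] for i ≤ r, j ≤ c
def RS (d : List (List Int)) (r c : Nat) : Int :=
  ((d.take (r+1)).map (fun row => (row.take (c+1)).sum)).sum

-- fixed-dimension shape of the difference array
def ShapeD (R C : Nat) (d : List (List Int)) : Prop :=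
  d.length = R + 1 ∧ ∀ i : Nat, i < R + 1 → (d.getD i []).length = C + 1

theorem RS_bump (R C : Nat) (d : List (List Int)) (hs : ShapeD R C d)
    (p q v : Int) (hp : 0 ≤ p) (hpR : p < (R:Int) + 1) (hq : 0 ≤ q) (hqC : q < (C:Int) + 1) :
    ShapeD R C (pvBump d p q v) ∧
      ∀ r c : Nat, RS (pvBump d p q v) r c =
        RS d r c + (if p.toNat ≤ r ∧ q.toNat ≤ c then v else 0) := by
  have hdl : d.length = R + 1 := hs.1
  have hpN : p.toNat < R + 1 := by omega
  have hqN : q.toNat < C + 1 := by omega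
  have hrowlen : (d.getD p.toNat []).length = C + 1 := hs.2 p.toNat hpN
  have hpd : PySem.List.pyGetD d p [] = d.getD p.toNat [] := by
    rw [PySem.List.pyGetD_eq_getElem d [] hp (by rw [hdl]; push_cast; omega)]
    exact (List.getD_eq_getElem _ _ (by omega)).symm
  have hval : PySem.List.pyGetD (PySem.List.pyGetD d p []) q 0 = (d.getD p.toNat []).getD q.toNat 0 := by
    rw [hpd, PySem.List.pyGetD_eq_getElem _ 0 hq (by rw [hrowlen]; push_cast; omega)]
    exact (List.getD_eq_getElem _ _ (by omega)).symm
  have hb : pvBump d p q v =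
      d.set p.toNat ((d.getD p.toNat []).set q.toNat ((d.getD p.toNat []).getD q.toNat 0 + v)) := by
    rw [pvBump, hval, PySem.List.pySetD_of_nonneg _ _ hp, PySem.List.pySetD_of_nonneg _ _ hq, hpd]
  rw [hb]
  constructor
  · constructor
    · simpa using hdl
    · intro i hi
      rw [getD_set_eq]
      split_ifs with h
      · rw [List.length_set]; exact hrowlen
      · exact hs.2 i hi
  · intro r c
    unfold RS
    rw [List.map_take, List.map_take, List.map_set, sum_take_set]
    have hgd : (d.map (fun row => (row.take (c+1)).sum)).getD p.toNat 0
        = ((d.getD p.toNat []).take (c+1)).sum := by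
      rw [List.getD_eq_getElem _ _ (by rw [List.length_map]; omega), List.getElem_map,
        List.getD_eq_getElem _ _ (by omega)]
    have hfx : ((((d.getD p.toNat []).set q.toNat ((d.getD p.toNat []).getD q.toNat 0 + v)).take (c+1)).sum)
        = ((d.getD p.toNat []).take (c+1)).sum + (if q.toNat < c + 1 then v else 0) := by
      rw [sum_take_set]
      rcases Nat.lt_or_ge q.toNat (c+1) with h2 | h2
      · rw [if_pos (show q.toNat < c + 1 ∧ q.toNat < (d.getD p.toNat []).length from ⟨h2, by omega⟩),
          if_pos h2]
        ring
      · rw [if_neg (show ¬(q.toNat < c + 1 ∧ q.toNat < (d.getD p.toNat []).length) by omega),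
          if_neg (by omega)]
    simp only [hgd, hfx, List.length_map]
    by_cases h1 : p.toNat < r + 1
    · rw [if_pos ⟨h1, by omega⟩]
      by_cases h2 : q.toNat < c + 1
      · rw [if_pos h2, if_pos ⟨by omega, by omega⟩]
        ring
      · rw [if_neg h2, if_neg (by omega)]
        ring
    · rw [if_neg (by omega), if_neg (by omega)]

theorem foldl_RS_char {α : Type} (R C : Nat) (w : α → Nat → Nat → Int) :
    ∀ (L : List α) (F : List (List Int) → α → List (List Int)),
      (∀ d a, a ∈ L → ShapeD R C d → ShapeD R C (F d a) ∧
        ∀ r c : Nat, RS (F d a) r c = RS d r c + w a r c) →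
      ∀ d, ShapeD R C d → ShapeD R C (L.foldl F d) ∧
        ∀ r c : Nat, RS (L.foldl F d) r c = RS d r c + ((L.map (fun a => w a r c)).sum) := by
  intro L
  induction L with
  | nil => intro F _ d hs; simpa using hs
  | cons x L ih =>
      intro F hF d hs
      have hx := hF d x (by simp) hs
      have hrest := ih F (fun d a ha hs => hF d a (by simp [ha]) hs) (F d x) hx.1
      refine ⟨hrest.1, ?_⟩
      intro r c
      rw [List.foldl_cons, hrest.2 r c, hx.2 r c]
      simp only [List.map_cons, List.sum_cons]
      ring

-- window of a mapped pyRange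
theorem map_pyRange_drop (f : Int → Int) (n a : Int) (h0 : 0 ≤ a) (han : a ≤ n) :
    ((PySem.List.pyRange 0 n 1).map f).drop a.toNat = (PySem.List.pyRange a n 1).map f := by
  rw [PySem.List.pyRange_one_append 0 a n h0 han, List.map_append, List.drop_append_of_le_length
    (by rw [List.length_map, PySem.List.length_pyRange_one]; omega)]
  rw [List.drop_eq_nil_of_le (by rw [List.length_map, PySem.List.length_pyRange_one]; omega)]
  simp

theorem map_pyRange_take (f : Int → Int) (a b c : Int) (hab : a ≤ b) (hbc : b ≤ c) :
    ((PySem.List.pyRange a c 1).map f).take (b - a).toNat = (PySem.List.pyRange a b 1).map f := by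
  rw [PySem.List.pyRange_one_append a b c hab hbc, List.map_append]
  rw [List.take_append_of_le_length (by rw [List.length_map, PySem.List.length_pyRange_one])]
  rw [List.take_of_length_le (by rw [List.length_map, PySem.List.length_pyRange_one])]

-- ===== B-side structure: the zeta-expanded pieces of transform_alt's some-branch =====

def BRp (g : List (List Int)) (lc : Int) : List (List Int) :=
  g.map (fun row => pyAccum ((PySem.List.slice row none
    (some (PySem.List.len (PySem.List.pyGetD g 0 [])))).map (fun x => if x == lc then (1:Int) else 0)))

def BCp (g : List (List Int)) (lc : Int) : List (List Int) :=
  (PySem.List.pyRange 0 (PySem.List.len (PySem.List.pyGetD g 0 [])) 1).map (fun c =>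
    pyAccum ((PySem.List.pyRange 0 (PySem.List.len g) 1).map
      (fun r => if gcell g r c == lc then (1:Int) else 0)))

def BBp (g : List (List Int)) (bg : Int) : List (List Int) :=
  List.scanl (fun acc row => List.zipWith (· + ·) acc row)
    (List.replicate ((PySem.List.len (PySem.List.pyGetD g 0 [])).toNat + 1) (0:Int)) (BRp g bg)

def BTest (g : List (List Int)) (lc bg t b l rr : Int) : Bool :=
  (gcell (BRp g lc) t (rr+1) - gcell (BRp g lc) t l == rr - l + 1)
  && (gcell (BRp g lc) b (rr+1) - gcell (BRp g lc) b l == rr - l + 1)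
  && (gcell (BCp g lc) l (b+1) - gcell (BCp g lc) l t == b - t + 1)
  && (gcell (BCp g lc) rr (b+1) - gcell (BCp g lc) rr t == b - t + 1)
  && decide (0 < gcell (BBp g bg) b rr - gcell (BBp g bg) (t+1) rr
      - gcell (BBp g bg) b (l+1) + gcell (BBp g bg) (t+1) (l+1))

def BDiff (g : List (List Int)) (lc bg : Int) : List (List Int) :=
  (PySem.List.pyRange 0 (PySem.List.len g) 1).foldl (fun d t =>
    (PySem.List.pyRange (t+2) (PySem.List.len g) 1).foldl (fun d b =>
      (PySem.List.pyRange 0 (PySem.List.len (PySem.List.pyGetD g 0 [])) 1).foldl (fun d l =>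
        (PySem.List.pyRange (l+2) (PySem.List.len (PySem.List.pyGetD g 0 [])) 1).foldl (fun d rr =>
          if BTest g lc bg t b l rr
          then pvBump (pvBump (pvBump (pvBump d (t+1) (l+1) 1) (t+1) rr (-1)) b (l+1) (-1)) b rr 1
          else d) d) d) d)
    (List.replicate ((PySem.List.len g).toNat + 1)
      (List.replicate ((PySem.List.len (PySem.List.pyGetD g 0 [])).toNat + 1) (0:Int)))

def BCover (g : List (List Int)) (lc bg : Int) : List (List Int) :=
  List.scanl (fun acc ra => List.zipWith (· + ·) acc ra)
    (List.replicate ((PySem.List.len (PySem.List.pyGetD g 0 [])).toNat + 2) (0:Int))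
    ((BDiff g lc bg).map (fun drow => pyAccum drow))

def BOut (g : List (List Int)) (lc bg : Int) : List (List Int) :=
  (PySem.List.enumerate g).map (fun p =>
    (PySem.List.enumerate p.2).map (fun q =>
      if q.2 == bg && decide (q.1 < PySem.List.len (PySem.List.pyGetD g 0 []))
         && decide (0 < gcell (BCover g lc bg) (p.1 + 1) (q.1 + 1))
      then 8 else q.2))

-- the strict-containment existence statement both sides reduce to
def InRect (g : List (List Int)) (lc bg : Int) (i j : Int) : Prop :=
  ∃ t b l rr : Int, 0 ≤ t ∧ t + 2 ≤ b ∧ b < PySem.List.len g ∧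
    0 ≤ l ∧ l + 2 ≤ rr ∧ rr < PySem.List.len (PySem.List.pyGetD g 0 []) ∧
    EdgesBg g lc bg t l b rr ∧ t < i ∧ i < b ∧ l < j ∧ j < rr

theorem rp_cell (g : List (List Int)) (lc : Int)
    (hrow : ∀ row ∈ g, (g.getD 0 []).length ≤ row.length)
    (t k : Int) (ht : 0 ≤ t) (htR : t < (g.length : Int))
    (hk : 0 ≤ k) (hkC : k ≤ ((g.getD 0 []).length : Int)) :
    gcell (BRp g lc) t k =
      ((((g.getD t.toNat []).take (g.getD 0 []).length).map
        (fun x => if x == lc then (1:Int) else 0)).take k.toNat).sum := by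
  have hC0 := len_pyGetD_zero g
  have htN : t.toNat < g.length := by omega
  have hmem : g.getD t.toNat [] ∈ g := by
    rw [List.getD_eq_getElem _ _ htN]; exact List.getElem_mem htN
  have hrl : (g.getD 0 []).length ≤ (g.getD t.toNat []).length := hrow _ hmem
  have hXlen : (((g.getD t.toNat []).take (g.getD 0 []).length).map
      (fun x => if x == lc then (1:Int) else 0)).length = (g.getD 0 []).length := by
    rw [List.length_map, List.length_take]; omega
  have hslice : PySem.List.slice (g.getD t.toNat []) none
      (some (PySem.List.len (PySem.List.pyGetD g 0 []))) =
      (g.getD t.toNat []).take (g.getD 0 []).length := by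
    rw [hC0, PySem.List.slice_to _ (by positivity)]
    norm_num
  have hrow0 : PySem.List.pyGetD (BRp g lc) t [] =
      pyAccum (((g.getD t.toNat []).take (g.getD 0 []).length).map
        (fun x => if x == lc then (1:Int) else 0)) := by
    unfold BRp
    rw [PySem.List.pyGetD_eq_getElem _ _ ht (by rw [List.length_map]; push_cast; omega),
      List.getElem_map, ← List.getD_eq_getElem _ _ htN, hslice]
  unfold gcell
  rw [hrow0]
  rw [PySem.List.pyGetD_eq_getElem _ _ hk (by rw [length_pyAccum, hXlen]; push_cast; omega)]
  rw [← List.getD_eq_getElem _ _ (show k.toNat < (pyAccum (((g.getD t.toNat []).take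
      (g.getD 0 []).length).map (fun x => if x == lc then (1:Int) else 0))).length by
      rw [length_pyAccum, hXlen]; omega)]
  exact pyAccum_getD _ k.toNat (by rw [hXlen]; omega)

theorem rp_solid_iff (g : List (List Int)) (lc : Int)
    (hrow : ∀ row ∈ g, (g.getD 0 []).length ≤ row.length)
    (t l rr : Int) (ht : 0 ≤ t) (htR : t < (g.length : Int))
    (hl : 0 ≤ l) (hlr : l + 2 ≤ rr) (hrr : rr < ((g.getD 0 []).length : Int)) :
    ((gcell (BRp g lc) t (rr+1) - gcell (BRp g lc) t l == rr - l + 1) = true) ↔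
      ∀ x : Int, l ≤ x → x ≤ rr → gcell g t x = lc := by
  have htN : t.toNat < g.length := by omega
  have hmem : g.getD t.toNat [] ∈ g := by
    rw [List.getD_eq_getElem _ _ htN]; exact List.getElem_mem htN
  have hrl : (g.getD 0 []).length ≤ (g.getD t.toNat []).length := hrow _ hmem
  rw [rp_cell g lc hrow t (rr+1) ht htR (by omega) (by omega),
      rp_cell g lc hrow t l ht htR hl (by omega), beq_iff_eq]
  rw [take_sum_sub _ l.toNat (rr+1).toNat (by omega)]
  have hwin : ((((g.getD t.toNat []).take (g.getD 0 []).length).map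
      (fun x => if x == lc then (1:Int) else 0)).drop l.toNat).take ((rr+1).toNat - l.toNat)
      = (PySem.List.slice (g.getD t.toNat []) (some l) (some (rr+1))).map
          (fun x => if x == lc then (1:Int) else 0) := by
    rw [← List.map_drop, ← List.map_take, List.drop_take, List.take_take]
    have hmin : min ((rr+1).toNat - l.toNat) ((g.getD 0 []).length - l.toNat)
        = (rr+1).toNat - l.toNat := by omega
    rw [hmin, PySem.List.slice_toNat _ hl (by omega)]
  rw [hwin]
  have hlen : ((PySem.List.slice (g.getD t.toNat []) (some l) (some (rr+1))).map
      (fun x => if x == lc then (1:Int) else 0)).length = (rr+1).toNat - l.toNat := by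
    rw [List.length_map, PySem.List.slice_toNat _ hl (by omega), List.length_take,
      List.length_drop]
    omega
  have hlen2 : (rr - l + 1 : Int) =
      ((PySem.List.slice (g.getD t.toNat []) (some l) (some (rr+1))).length : Int) := by
    rw [PySem.List.slice_toNat _ hl (by omega), List.length_take, List.length_drop]
    push_cast
    omega
  rw [hlen2, sum_map_ind_eq_len_iff, ← List.all_eq_true,
    all_slice_iff _ l (rr+1) _ hl (by omega) (by push_cast; omega)]
  have hrowg : PySem.List.pyGetD g t [] = g.getD t.toNat [] := by
    rw [PySem.List.pyGetD_eq_getElem g [] ht (by push_cast; omega),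
      List.getD_eq_getElem _ _ htN]
  constructor
  · intro H x hx1 hx2
    have := H x hx1 (by omega)
    rw [← beq_iff_eq (a := gcell g t x)]
    unfold gcell
    rw [hrowg]
    exact this
  · intro H x hx1 hx2
    have := H x hx1 (by omega)
    rw [← beq_iff_eq (a := gcell g t x)] at this
    unfold gcell at this
    rw [hrowg] at this
    exact this

theorem cp_solid_iff (g : List (List Int)) (lc : Int)
    (c t b : Int) (hc : 0 ≤ c) (hcC : c < ((g.getD 0 []).length : Int))
    (ht : 0 ≤ t) (htb : t + 2 ≤ b) (hbR : b < (g.length : Int)) :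
    ((gcell (BCp g lc) c (b+1) - gcell (BCp g lc) c t == b - t + 1) = true) ↔
      ∀ x : Int, t ≤ x → x ≤ b → gcell g x c = lc := by
  have hC0 := len_pyGetD_zero g
  have hcell : ∀ k : Int, 0 ≤ k → k ≤ (g.length : Int) →
      gcell (BCp g lc) c k =
        (((PySem.List.pyRange 0 (PySem.List.len g) 1).map
          (fun r => if gcell g r c == lc then (1:Int) else 0)).take k.toNat).sum := by
    intro k hk hkR
    have hcol : PySem.List.pyGetD (BCp g lc) c [] =
        pyAccum ((PySem.List.pyRange 0 (PySem.List.len g) 1).map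
          (fun r => if gcell g r c == lc then (1:Int) else 0)) := by
      unfold BCp
      exact PySem.List.pyGetD_map_pyRange_of_nonneg _ _ _ _ hc (by rw [hC0]; exact hcC)
    have hclen : ((PySem.List.pyRange 0 (PySem.List.len g) 1).map
        (fun r => if gcell g r c == lc then (1:Int) else 0)).length = g.length := by
      rw [List.length_map, PySem.List.length_pyRange_one]
      simp [PySem.List.len_eq]
    unfold gcell
    rw [hcol, PySem.List.pyGetD_eq_getElem _ _ hk (by rw [length_pyAccum, hclen]; push_cast; omega)]
    rw [← List.getD_eq_getElem _ _ (show k.toNat < (pyAccum ((PySem.List.pyRange 0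
        (PySem.List.len g) 1).map (fun r => if gcell g r c == lc then (1:Int) else 0))).length by
        rw [length_pyAccum, hclen]; omega)]
    exact pyAccum_getD _ k.toNat (by rw [hclen]; omega)
  rw [hcell (b+1) (by omega) (by omega), hcell t ht (by omega), beq_iff_eq]
  rw [take_sum_sub _ t.toNat (b+1).toNat (by omega)]
  have hwin : ((((PySem.List.pyRange 0 (PySem.List.len g) 1).map
      (fun r => if gcell g r c == lc then (1:Int) else 0)).drop t.toNat).take ((b+1).toNat - t.toNat))
      = (PySem.List.pyRange t (b+1) 1).map (fun r => if gcell g r c == lc then (1:Int) else 0) := by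
    have hn : PySem.List.len g = (g.length : Int) := by simp [PySem.List.len_eq]
    rw [hn, map_pyRange_drop _ (g.length : Int) t ht (by omega)]
    have hconv : (b+1).toNat - t.toNat = ((b+1) - t).toNat := by omega
    rw [hconv]
    exact map_pyRange_take _ t (b+1) (g.length:Int) (by omega) (by omega)
  rw [hwin]
  have hlen2 : (b - t + 1 : Int) = ((PySem.List.pyRange t (b+1) 1).length : Int) := by
    rw [PySem.List.length_pyRange_one]
    push_cast
    omega
  rw [hlen2, sum_map_ind_eq_len_iff]
  constructor
  · intro H x hx1 hx2
    have := H x (by rw [PySem.List.mem_pyRange_one]; omega)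
    exact beq_iff_eq.mp this
  · intro H x hx
    rw [PySem.List.mem_pyRange_one] at hx
    exact beq_iff_eq.mpr (H x (by omega) (by omega))

theorem getD_replicate_zero (n q : Nat) : (List.replicate n (0:Int)).getD q 0 = 0 := by
  by_cases h : q < n
  · rw [List.getD_eq_getElem _ _ (by simpa using h), List.getElem_replicate]
  · rw [List.getD_eq_default _ _ (by simpa using h)]

theorem exists_window_iff {α : Type} (L : List α) (k1 k2 : Nat) (P : α → Prop) :
    (∃ x ∈ (L.drop k1).take (k2 - k1), P x) ↔
      ∃ i : Nat, k1 ≤ i ∧ i < k2 ∧ ∃ h : i < L.length, P (L[i]'h) := by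
  constructor
  · rintro ⟨x, hx, hP⟩
    obtain ⟨m, hm, rfl⟩ := List.mem_iff_getElem.mp hx
    have hmlen := hm
    simp only [List.length_take, List.length_drop] at hmlen
    have hlen : k1 + m < L.length := by omega
    have hidx : ((L.drop k1).take (k2-k1))[m]'hm = L[k1+m]'hlen := by
      rw [List.getElem_take, List.getElem_drop]
    rw [hidx] at hP
    exact ⟨k1+m, by omega, by omega, hlen, hP⟩
  · rintro ⟨i, h1, h2, h3, hP⟩
    have hm : i - k1 < ((L.drop k1).take (k2-k1)).length := by
      simp only [List.length_take, List.length_drop]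
      omega
    refine ⟨((L.drop k1).take (k2-k1))[i - k1]'hm, List.getElem_mem hm, ?_⟩
    have hidx : ((L.drop k1).take (k2-k1))[i - k1]'hm = L[i]'h3 := by
      rw [List.getElem_take, List.getElem_drop]
      congr 1
      omega
    rw [hidx]
    exact hP

theorem bp_interior_iff (g : List (List Int)) (bg : Int)
    (hrow : ∀ row ∈ g, (g.getD 0 []).length ≤ row.length)
    (t b l rr : Int) (ht : 0 ≤ t) (htb : t + 2 ≤ b) (hbR : b < (g.length : Int))
    (hl : 0 ≤ l) (hlr : l + 2 ≤ rr) (hrr : rr < ((g.getD 0 []).length : Int)) :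
    (0 < gcell (BBp g bg) b rr - gcell (BBp g bg) (t+1) rr
        - gcell (BBp g bg) b (l+1) + gcell (BBp g bg) (t+1) (l+1)) ↔
      ∃ x y : Int, t < x ∧ x < b ∧ l < y ∧ y < rr ∧ gcell g x y = bg := by
  have hC0 := len_pyGetD_zero g
  have hslice : ∀ row ∈ g, PySem.List.slice row none
      (some (PySem.List.len (PySem.List.pyGetD g 0 []))) = row.take (g.getD 0 []).length := by
    intro row hm
    rw [hC0, PySem.List.slice_to _ (by positivity)]
    norm_num
  have hlens : ∀ r ∈ BRp g bg, r.length = (g.getD 0 []).length + 1 := by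
    intro r hr
    unfold BRp at hr
    obtain ⟨row, hrowmem, rfl⟩ := List.mem_map.mp hr
    rw [length_pyAccum, List.length_map, hslice row hrowmem, List.length_take]
    have := hrow row hrowmem
    omega
  have hzlen : (List.replicate ((PySem.List.len (PySem.List.pyGetD g 0 [])).toNat + 1) (0:Int)).length
      = (g.getD 0 []).length + 1 := by
    rw [List.length_replicate, hC0]
    omega
  have hRlen : (BRp g bg).length = g.length := by
    unfold BRp
    rw [List.length_map]
  -- the bp cell value
  have bp_cell : ∀ p k : Int, 0 ≤ p → p ≤ (g.length : Int) → 0 ≤ k → k ≤ ((g.getD 0 []).length : Int) →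
      gcell (BBp g bg) p k = ((g.take p.toNat).map (fun row =>
        ((((row.take (g.getD 0 []).length).map (fun x => if x == bg then (1:Int) else 0)).take k.toNat).sum))).sum := by
    intro p k hp hpR hk hkC
    unfold gcell BBp
    rw [PySem.List.pyGetD_eq_getElem _ _ hp
      (by rw [List.length_scanl, hRlen]; push_cast; omega)]
    rw [← List.getD_eq_getElem _ _ (show p.toNat < (List.scanl (fun acc row => List.zipWith (· + ·) acc row)
        (List.replicate ((PySem.List.len (PySem.List.pyGetD g 0 [])).toNat + 1) (0:Int)) (BRp g bg)).length
        by rw [List.length_scanl, hRlen]; omega)]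
    rw [show k = ((k.toNat : Nat) : Int) from by omega, PySem.List.pyGetD_natCast]
    rw [scanl_zip_getD (BRp g bg) _ (fun r hr => by rw [hzlen]; exact hlens r hr) p.toNat
      (by rw [hRlen]; omega) k.toNat]
    rw [getD_replicate_zero, zero_add]
    have htake : (BRp g bg).take p.toNat = (g.take p.toNat).map (fun row =>
        pyAccum ((PySem.List.slice row none
          (some (PySem.List.len (PySem.List.pyGetD g 0 [])))).map (fun x => if x == bg then (1:Int) else 0))) := by
      unfold BRp
      exact (List.map_take ..).symm
    rw [htake, List.map_map]
    apply congrArg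
    apply List.map_congr_left
    intro row hrowmem
    have hrg : row ∈ g := List.mem_of_mem_take hrowmem
    simp only [Function.comp_apply]
    rw [hslice row hrg]
    have hXlen : ((row.take (g.getD 0 []).length).map (fun x => if x == bg then (1:Int) else 0)).length
        = (g.getD 0 []).length := by
      rw [List.length_map, List.length_take]
      have := hrow row hrg
      omega
    exact pyAccum_getD _ k.toNat (by rw [hXlen]; omega)
  -- rewrite the four corners
  rw [bp_cell b rr (by omega) (by omega) (by omega) (by omega),
      bp_cell (t+1) rr (by omega) (by omega) (by omega) (by omega),
      bp_cell b (l+1) (by omega) (by omega) (by omega) (by omega),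
      bp_cell (t+1) (l+1) (by omega) (by omega) (by omega) (by omega)]
  -- abbreviations
  have hMk : ∀ (k : Nat) (p : Nat), ((g.take p).map (fun row =>
      ((((row.take (g.getD 0 []).length).map (fun x => if x == bg then (1:Int) else 0)).take k).sum)))
      = ((g.map (fun row =>
      ((((row.take (g.getD 0 []).length).map (fun x => if x == bg then (1:Int) else 0)).take k).sum))).take p) := by
    intro k p
    exact List.map_take ..
  rw [hMk, hMk, hMk, hMk]
  have hcombo : ∀ X Y : List Int,
      (X.take b.toNat).sum - (X.take (t+1).toNat).sum - ((Y.take b.toNat).sum - (Y.take (t+1).toNat).sum)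
      = ((X.drop (t+1).toNat).take (b.toNat - (t+1).toNat)).sum
        - ((Y.drop (t+1).toNat).take (b.toNat - (t+1).toNat)).sum := by
    intro X Y
    rw [take_sum_sub X (t+1).toNat b.toNat (by omega), take_sum_sub Y (t+1).toNat b.toNat (by omega)]
  rw [show ∀ a b' c d : Int, a - b' - c + d = (a - b') - (c - d) from by intros; ring]
  rw [hcombo]
  rw [← List.map_drop, ← List.map_drop, ← List.map_take, ← List.map_take, sum_map_sub]
  -- per-row function on the window
  have hpsi : ∀ row ∈ g,
      ((((row.take (g.getD 0 []).length).map (fun x => if x == bg then (1:Int) else 0)).take rr.toNat).sum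
        - (((row.take (g.getD 0 []).length).map (fun x => if x == bg then (1:Int) else 0)).take (l+1).toNat).sum)
      = ((PySem.List.slice row (some (l+1)) (some rr)).map (fun x => if x == bg then (1:Int) else 0)).sum := by
    intro row hrg
    have hrl := hrow row hrg
    rw [take_sum_sub _ (l+1).toNat rr.toNat (by omega)]
    rw [← List.map_drop, ← List.map_take, List.drop_take, List.take_take]
    have hmin : min (rr.toNat - (l+1).toNat) ((g.getD 0 []).length - (l+1).toNat)
        = rr.toNat - (l+1).toNat := by omega
    rw [hmin, PySem.List.slice_toNat _ (by omega) (by omega)]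
  rw [sum_map_pos_iff _ _ (fun row hrw => by
    rw [hpsi row (List.mem_of_mem_drop (List.mem_of_mem_take hrw))]
    exact sum_map_ind_nonneg _ _)]
  have hiter : ∀ row ∈ g, (0 <
      (((row.take (g.getD 0 []).length).map (fun x => if x == bg then (1:Int) else 0)).take rr.toNat).sum
        - (((row.take (g.getD 0 []).length).map (fun x => if x == bg then (1:Int) else 0)).take (l+1).toNat).sum)
      ↔ ∃ y : Int, l + 1 ≤ y ∧ y < rr ∧ PySem.List.pyGetD row y 0 = bg := by
    intro row hrg
    have hrl := hrow row hrg
    rw [hpsi row hrg, sum_map_ind_pos_iff]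
    rw [show (∃ y ∈ PySem.List.slice row (some (l+1)) (some rr), (y == bg) = true)
        ↔ ((PySem.List.slice row (some (l+1)) (some rr)).any (fun y => y == bg) = true) from
      (List.any_eq_true).symm]
    rw [any_slice_iff row (l+1) rr _ (by omega) (by omega) (by push_cast; omega)]
    constructor
    · rintro ⟨y, h1, h2, h3⟩
      exact ⟨y, h1, h2, beq_iff_eq.mp h3⟩
    · rintro ⟨y, h1, h2, h3⟩
      exact ⟨y, h1, h2, beq_iff_eq.mpr h3⟩
  rw [exists_window_iff g (t+1).toNat b.toNat (fun row => 0 <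
      (((row.take (g.getD 0 []).length).map (fun x => if x == bg then (1:Int) else 0)).take rr.toNat).sum
        - (((row.take (g.getD 0 []).length).map (fun x => if x == bg then (1:Int) else 0)).take (l+1).toNat).sum)]
  constructor
  · rintro ⟨i, h1, h2, h3, hP⟩
    have hmem : g[i]'h3 ∈ g := List.getElem_mem h3
    obtain ⟨y, hy1, hy2, hy3⟩ := (hiter _ hmem).mp hP
    refine ⟨(i:Int), y, by omega, by omega, by omega, by omega, ?_⟩
    unfold gcell
    have hgi : PySem.List.pyGetD g (i:Int) [] = g[i]'h3 := by
      rw [PySem.List.pyGetD_eq_getElem g [] (by omega) (by push_cast; omega)]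
      simp only [Int.toNat_natCast]
    rw [hgi]
    exact hy3
  · rintro ⟨x, y, hx1, hx2, hy1, hy2, hxy⟩
    have hxN : x.toNat < g.length := by omega
    refine ⟨x.toNat, by omega, by omega, hxN, ?_⟩
    apply (hiter _ (List.getElem_mem hxN)).mpr
    refine ⟨y, by omega, by omega, ?_⟩
    unfold gcell at hxy
    rw [PySem.List.pyGetD_eq_getElem g [] (by omega) (by push_cast; omega)] at hxy
    exact hxy

theorem btest_iff_edges (g : List (List Int)) (lc bg : Int)
    (hrow : ∀ row ∈ g, (g.getD 0 []).length ≤ row.length)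
    (t b l rr : Int) (ht : 0 ≤ t) (htb : t + 2 ≤ b) (hbR : b < (g.length : Int))
    (hl : 0 ≤ l) (hlr : l + 2 ≤ rr) (hrr : rr < ((g.getD 0 []).length : Int)) :
    (BTest g lc bg t b l rr = true) ↔ EdgesBg g lc bg t l b rr := by
  unfold BTest EdgesBg
  simp only [Bool.and_eq_true, decide_eq_true_eq]
  rw [rp_solid_iff g lc hrow t l rr ht (by omega) hl hlr hrr,
      rp_solid_iff g lc hrow b l rr (by omega) hbR hl hlr hrr,
      cp_solid_iff g lc l t b hl (by omega) ht htb hbR,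
      cp_solid_iff g lc rr t b (by omega) hrr ht htb hbR]
  rw [bp_interior_iff g bg hrow t b l rr ht htb hbR hl hlr hrr]
  tauto

theorem bdiff_char (g : List (List Int)) (lc bg : Int) :
    ShapeD g.length (g.getD 0 []).length (BDiff g lc bg) ∧
      ∀ r c : Nat, RS (BDiff g lc bg) r c =
        (((PySem.List.pyRange 0 (PySem.List.len g) 1).map (fun t =>
          (((PySem.List.pyRange (t+2) (PySem.List.len g) 1).map (fun b =>
            (((PySem.List.pyRange 0 (PySem.List.len (PySem.List.pyGetD g 0 [])) 1).map (fun l =>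
              (((PySem.List.pyRange (l+2) (PySem.List.len (PySem.List.pyGetD g 0 [])) 1).map (fun rr =>
                if BTest g lc bg t b l rr ∧ t < (r:Int) ∧ (r:Int) < b ∧ l < (c:Int) ∧ (c:Int) < rr
                then (1:Int) else 0)).sum))).sum))).sum))).sum) := by
  have hlen : (PySem.List.len g) = (g.length:Int) := by simp [PySem.List.len_eq]
  have hC0 := len_pyGetD_zero g
  have hinit : ShapeD g.length (g.getD 0 []).length
      (List.replicate ((PySem.List.len g).toNat + 1)
        (List.replicate ((PySem.List.len (PySem.List.pyGetD g 0 [])).toNat + 1) (0:Int))) := by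
    constructor
    · rw [List.length_replicate, hlen]
      omega
    · intro i hi
      rw [List.getD_eq_getElem _ _ (by rw [List.length_replicate, hlen]; omega),
        List.getElem_replicate, List.length_replicate, hC0]
      omega
  have hRS0 : ∀ r c : Nat, RS (List.replicate ((PySem.List.len g).toNat + 1)
      (List.replicate ((PySem.List.len (PySem.List.pyGetD g 0 [])).toNat + 1) (0:Int))) r c = 0 := by
    intro r c
    unfold RS
    rw [List.take_replicate, List.map_replicate, List.take_replicate, List.sum_replicate,
      List.sum_replicate]
    simp
  unfold BDiff
  suffices Hstep : ∀ (d : List (List Int)) (t : Int), t ∈ PySem.List.pyRange 0 (PySem.List.len g) 1 →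
      ShapeD g.length (g.getD 0 []).length d →
      ShapeD g.length (g.getD 0 []).length
        ((PySem.List.pyRange (t+2) (PySem.List.len g) 1).foldl (fun d b =>
          (PySem.List.pyRange 0 (PySem.List.len (PySem.List.pyGetD g 0 [])) 1).foldl (fun d l =>
            (PySem.List.pyRange (l+2) (PySem.List.len (PySem.List.pyGetD g 0 [])) 1).foldl (fun d rr =>
              if BTest g lc bg t b l rr
              then pvBump (pvBump (pvBump (pvBump d (t+1) (l+1) 1) (t+1) rr (-1)) b (l+1) (-1)) b rr 1
              else d) d) d) d) ∧
      ∀ r c : Nat, RS ((PySem.List.pyRange (t+2) (PySem.List.len g) 1).foldl (fun d b =>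
          (PySem.List.pyRange 0 (PySem.List.len (PySem.List.pyGetD g 0 [])) 1).foldl (fun d l =>
            (PySem.List.pyRange (l+2) (PySem.List.len (PySem.List.pyGetD g 0 [])) 1).foldl (fun d rr =>
              if BTest g lc bg t b l rr
              then pvBump (pvBump (pvBump (pvBump d (t+1) (l+1) 1) (t+1) rr (-1)) b (l+1) (-1)) b rr 1
              else d) d) d) d) r c = RS d r c +
        (((PySem.List.pyRange (t+2) (PySem.List.len g) 1).map (fun b =>
          (((PySem.List.pyRange 0 (PySem.List.len (PySem.List.pyGetD g 0 [])) 1).map (fun l =>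
            (((PySem.List.pyRange (l+2) (PySem.List.len (PySem.List.pyGetD g 0 [])) 1).map (fun rr =>
              if BTest g lc bg t b l rr ∧ t < (r:Int) ∧ (r:Int) < b ∧ l < (c:Int) ∧ (c:Int) < rr
              then (1:Int) else 0)).sum))).sum))).sum) by
    have H := foldl_RS_char g.length (g.getD 0 []).length
      (w := fun (t : Int) (r c : Nat) =>
        (((PySem.List.pyRange (t+2) (PySem.List.len g) 1).map (fun b =>
          (((PySem.List.pyRange 0 (PySem.List.len (PySem.List.pyGetD g 0 [])) 1).map (fun l =>
            (((PySem.List.pyRange (l+2) (PySem.List.len (PySem.List.pyGetD g 0 [])) 1).map (fun rr =>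
              if BTest g lc bg t b l rr ∧ t < (r:Int) ∧ (r:Int) < b ∧ l < (c:Int) ∧ (c:Int) < rr
              then (1:Int) else 0)).sum))).sum))).sum))
      (PySem.List.pyRange 0 (PySem.List.len g) 1) _ Hstep _ hinit
    exact ⟨H.1, fun r c => by rw [H.2 r c, hRS0 r c, zero_add]⟩
  intro d t htmem hs
  rw [PySem.List.mem_pyRange_one] at htmem
  refine foldl_RS_char g.length (g.getD 0 []).length
    (w := fun (b : Int) (r c : Nat) =>
      (((PySem.List.pyRange 0 (PySem.List.len (PySem.List.pyGetD g 0 [])) 1).map (fun l =>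
        (((PySem.List.pyRange (l+2) (PySem.List.len (PySem.List.pyGetD g 0 [])) 1).map (fun rr =>
          if BTest g lc bg t b l rr ∧ t < (r:Int) ∧ (r:Int) < b ∧ l < (c:Int) ∧ (c:Int) < rr
          then (1:Int) else 0)).sum))).sum))
    (PySem.List.pyRange (t+2) (PySem.List.len g) 1) _ ?_ d hs
  intro d b hbmem hs
  rw [PySem.List.mem_pyRange_one] at hbmem
  refine foldl_RS_char g.length (g.getD 0 []).length
    (w := fun (l : Int) (r c : Nat) =>
      (((PySem.List.pyRange (l+2) (PySem.List.len (PySem.List.pyGetD g 0 [])) 1).map (fun rr =>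
        if BTest g lc bg t b l rr ∧ t < (r:Int) ∧ (r:Int) < b ∧ l < (c:Int) ∧ (c:Int) < rr
        then (1:Int) else 0)).sum))
    (PySem.List.pyRange 0 (PySem.List.len (PySem.List.pyGetD g 0 [])) 1) _ ?_ d hs
  intro d l hlmem hs
  rw [PySem.List.mem_pyRange_one] at hlmem
  refine foldl_RS_char g.length (g.getD 0 []).length
    (w := fun (rr : Int) (r c : Nat) =>
      if BTest g lc bg t b l rr ∧ t < (r:Int) ∧ (r:Int) < b ∧ l < (c:Int) ∧ (c:Int) < rr
      then (1:Int) else 0)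
    (PySem.List.pyRange (l+2) (PySem.List.len (PySem.List.pyGetD g 0 [])) 1) _ ?_ d hs
  intro d rr hrrmem hs
  rw [PySem.List.mem_pyRange_one] at hrrmem
  simp only []
  rw [hlen] at htmem hbmem
  rw [hC0] at hlmem hrrmem
  by_cases hbt : BTest g lc bg t b l rr = true
  case neg =>
    rw [if_neg hbt]
    refine ⟨hs, fun r c => ?_⟩
    rw [if_neg (fun h => hbt h.1)]
    ring
  rw [if_pos hbt]
  have B1 := RS_bump _ _ d hs (t+1) (l+1) 1 (by omega) (by push_cast; omega)
    (by omega) (by push_cast; omega)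
  have B2 := RS_bump _ _ _ B1.1 (t+1) rr (-1) (by omega) (by push_cast; omega)
    (by omega) (by push_cast; omega)
  have B3 := RS_bump _ _ _ B2.1 b (l+1) (-1) (by omega) (by push_cast; omega)
    (by omega) (by push_cast; omega)
  have B4 := RS_bump _ _ _ B3.1 b rr 1 (by omega) (by push_cast; omega)
    (by omega) (by push_cast; omega)
  refine ⟨B4.1, fun r c => ?_⟩
  rw [B4.2 r c, B3.2 r c, B2.2 r c, B1.2 r c]
  have hcond : (BTest g lc bg t b l rr = true ∧ t < (r:Int) ∧ (r:Int) < b ∧ l < (c:Int) ∧ (c:Int) < rr)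
      ↔ (t < (r:Int) ∧ (r:Int) < b ∧ l < (c:Int) ∧ (c:Int) < rr) := and_iff_right hbt
  rw [if_congr hcond rfl rfl]
  have harith : (if (t+1).toNat ≤ r ∧ (l+1).toNat ≤ c then (1:Int) else 0)
      + (if (t+1).toNat ≤ r ∧ rr.toNat ≤ c then (-1:Int) else 0)
      + (if b.toNat ≤ r ∧ (l+1).toNat ≤ c then (-1:Int) else 0)
      + (if b.toNat ≤ r ∧ rr.toNat ≤ c then (1:Int) else 0)
      = (if t < (r:Int) ∧ (r:Int) < b ∧ l < (c:Int) ∧ (c:Int) < rr then (1:Int) else 0) := by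
    split_ifs <;> omega
  rw [← harith]
  ring

theorem bcover_pos_iff (g : List (List Int)) (lc bg : Int)
    (hrow : ∀ row ∈ g, (g.getD 0 []).length ≤ row.length)
    (i j : Nat) (hi : i < g.length) (hj : j < (g.getD 0 []).length) :
    (0 < gcell (BCover g lc bg) ((i:Int) + 1) ((j:Int) + 1)) ↔
      InRect g lc bg (i:Int) (j:Int) := by
  have hlen : (PySem.List.len g) = (g.length:Int) := by simp [PySem.List.len_eq]
  have hC0 := len_pyGetD_zero g
  have hd := bdiff_char g lc bg
  have hDlen : (BDiff g lc bg).length = g.length + 1 := hd.1.1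
  have hDrows : ∀ drow ∈ BDiff g lc bg, drow.length = (g.getD 0 []).length + 1 := by
    intro drow hdm
    obtain ⟨m, hm, rfl⟩ := List.mem_iff_getElem.mp hdm
    rw [← List.getD_eq_getElem _ _ hm]
    exact hd.1.2 m (by omega)
  have hzlen2 : (List.replicate ((PySem.List.len (PySem.List.pyGetD g 0 [])).toNat + 2) (0:Int)).length
      = (g.getD 0 []).length + 2 := by
    rw [List.length_replicate, hC0]
    omega
  -- the cover cell is the region sum of the difference array
  have hcell : gcell (BCover g lc bg) ((i:Int) + 1) ((j:Int) + 1) = RS (BDiff g lc bg) i j := by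
    have hfetch : PySem.List.pyGetD (List.scanl (fun acc ra => List.zipWith (· + ·) acc ra)
        (List.replicate ((PySem.List.len (PySem.List.pyGetD g 0 [])).toNat + 2) (0:Int))
        ((BDiff g lc bg).map (fun drow => pyAccum drow))) ((i:Int)+1) []
        = (List.scanl (fun acc ra => List.zipWith (· + ·) acc ra)
            (List.replicate ((PySem.List.len (PySem.List.pyGetD g 0 [])).toNat + 2) (0:Int))
            ((BDiff g lc bg).map (fun drow => pyAccum drow))).getD (i+1) [] := by
      rw [PySem.List.pyGetD_eq_getElem _ _ (by omega)
        (by rw [List.length_scanl, List.length_map, hDlen]; push_cast; omega)]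
      simp only [show ((i:Int)+1).toNat = i + 1 from by omega]
      exact (List.getD_eq_getElem _ _
        (by rw [List.length_scanl, List.length_map, hDlen]; omega)).symm
    unfold gcell BCover
    rw [hfetch]
    rw [show ((j:Int)+1) = (((j+1 : Nat)):Int) from by push_cast; ring, PySem.List.pyGetD_natCast]
    rw [scanl_zip_getD ((BDiff g lc bg).map (fun drow => pyAccum drow)) _
      (fun r hr => by
        obtain ⟨drow, hdm, rfl⟩ := List.mem_map.mp hr
        rw [hzlen2, length_pyAccum, hDrows drow hdm]) (i+1)
      (by rw [List.length_map, hDlen]; omega) (j+1)]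
    rw [getD_replicate_zero, zero_add]
    rw [← List.map_take, List.map_map]
    unfold RS
    apply congrArg
    apply List.map_congr_left
    intro drow hdm
    have hdg : drow ∈ BDiff g lc bg := List.mem_of_mem_take hdm
    simp only [Function.comp_apply]
    exact pyAccum_getD _ (j+1) (by rw [hDrows drow hdg]; omega)
  rw [hcell, hd.2 i j]
  have hnn4 : ∀ t b l rr : Int, (0:Int) ≤
      (if BTest g lc bg t b l rr ∧ t < (i:Int) ∧ (i:Int) < b ∧ l < (j:Int) ∧ (j:Int) < rr
       then (1:Int) else 0) := by
    intro t b l rr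
    split_ifs <;> norm_num
  have hnn3 : ∀ t b l : Int, (0:Int) ≤
      (((PySem.List.pyRange (l+2) (PySem.List.len (PySem.List.pyGetD g 0 [])) 1).map (fun rr =>
        if BTest g lc bg t b l rr ∧ t < (i:Int) ∧ (i:Int) < b ∧ l < (j:Int) ∧ (j:Int) < rr
        then (1:Int) else 0)).sum) :=
    fun t b l => sum_map_nonneg _ _ (fun rr _ => hnn4 t b l rr)
  have hnn2 : ∀ t b : Int, (0:Int) ≤
      (((PySem.List.pyRange 0 (PySem.List.len (PySem.List.pyGetD g 0 [])) 1).map (fun l =>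
        (((PySem.List.pyRange (l+2) (PySem.List.len (PySem.List.pyGetD g 0 [])) 1).map (fun rr =>
          if BTest g lc bg t b l rr ∧ t < (i:Int) ∧ (i:Int) < b ∧ l < (j:Int) ∧ (j:Int) < rr
          then (1:Int) else 0)).sum))).sum) :=
    fun t b => sum_map_nonneg _ _ (fun l _ => hnn3 t b l)
  have hnn1 : ∀ t : Int, (0:Int) ≤
      (((PySem.List.pyRange (t+2) (PySem.List.len g) 1).map (fun b =>
        (((PySem.List.pyRange 0 (PySem.List.len (PySem.List.pyGetD g 0 [])) 1).map (fun l =>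
          (((PySem.List.pyRange (l+2) (PySem.List.len (PySem.List.pyGetD g 0 [])) 1).map (fun rr =>
            if BTest g lc bg t b l rr ∧ t < (i:Int) ∧ (i:Int) < b ∧ l < (j:Int) ∧ (j:Int) < rr
            then (1:Int) else 0)).sum))).sum))).sum) :=
    fun t => sum_map_nonneg _ _ (fun b _ => hnn2 t b)
  rw [sum_map_pos_iff _ _ (fun t _ => hnn1 t)]
  unfold InRect
  constructor
  · rintro ⟨t, htmem, hpt⟩
    obtain ⟨b, hbmem, hpb⟩ := (sum_map_pos_iff _ _ (fun b _ => hnn2 t b)).mp hpt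
    obtain ⟨l, hlmem, hpl⟩ := (sum_map_pos_iff _ _ (fun l _ => hnn3 t b l)).mp hpb
    obtain ⟨rr, hrrmem, hprr⟩ := (sum_map_pos_iff _ _ (fun rr _ => hnn4 t b l rr)).mp hpl
    rw [PySem.List.mem_pyRange_one] at htmem hbmem hlmem hrrmem
    have hcond : BTest g lc bg t b l rr = true ∧ t < (i:Int) ∧ (i:Int) < b ∧ l < (j:Int) ∧ (j:Int) < rr := by
      by_contra hcon
      rw [if_neg hcon] at hprr
      omega
    obtain ⟨hbt, hc1, hc2, hc3, hc4⟩ := hcond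
    have hE := (btest_iff_edges g lc bg hrow t b l rr htmem.1 (by omega)
      (by rw [← hlen]; exact hbmem.2) hlmem.1 (by omega)
      (by rw [← hC0]; exact hrrmem.2)).mp hbt
    exact ⟨t, b, l, rr, htmem.1, by omega, hbmem.2, hlmem.1, by omega,
      hrrmem.2, hE, hc1, hc2, hc3, hc4⟩
  · rintro ⟨t, b, l, rr, ht0, htb, hbR, hl0, hlr, hrrC, hE, hc1, hc2, hc3, hc4⟩
    rw [hlen] at hbR
    rw [hC0] at hrrC
    have hbt := (btest_iff_edges g lc bg hrow t b l rr ht0 htb (by exact_mod_cast hbR)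
      hl0 hlr (by exact_mod_cast hrrC)).mpr hE
    refine ⟨t, by rw [PySem.List.mem_pyRange_one, hlen]; omega, ?_⟩
    apply (sum_map_pos_iff _ _ (fun b _ => hnn2 t b)).mpr
    refine ⟨b, by rw [PySem.List.mem_pyRange_one, hlen]; omega, ?_⟩
    apply (sum_map_pos_iff _ _ (fun l _ => hnn3 t b l)).mpr
    refine ⟨l, by rw [PySem.List.mem_pyRange_one, hC0]; omega, ?_⟩
    apply (sum_map_pos_iff _ _ (fun rr _ => hnn4 t b l rr)).mpr
    refine ⟨rr, by rw [PySem.List.mem_pyRange_one, hC0]; omega, ?_⟩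
    rw [if_pos ⟨hbt, hc1, hc2, hc3, hc4⟩]
    norm_num

theorem condA_iff' (g : List (List Int)) (lc bg : Int)
    (hrow : ∀ row ∈ g, (g.getD 0 []).length ≤ row.length) (i j : Nat) :
    CondA g lc bg i j = true ↔ (gN g i j = bg ∧ InRect g lc bg (i:Int) (j:Int)) := by
  unfold CondA InRect
  simp only [List.any_eq_true, Bool.and_eq_true, PySem.List.mem_pyRange_one, decide_eq_true_eq,
    Bool.not_eq_true', bne_eq_false_iff_eq, beq_iff_eq]
  constructor
  · rintro ⟨t, ⟨ht0, htR⟩, l, ⟨hl0, hlC⟩, hguard, b, ⟨hb2, hbR⟩, rr, ⟨hrr2, hrrC⟩, hbdd,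
      r, ⟨hr1, hr2⟩, c, ⟨hc1, hc2⟩, hir, hjc, hbg⟩
    have hE := (isbdd_iff_edges g lc bg t l b rr ⟨hb2, hbR⟩ ⟨hrr2, hrrC⟩).mp hbdd
    have hi : (i : Int) = r := by omega
    have hj : (j : Int) = c := by omega
    exact ⟨hbg, t, b, l, rr, ht0, hb2, hbR, hl0, hrr2, hrrC, hE, by omega, by omega, by omega, by omega⟩
  · rintro ⟨hbg, t, b, l, rr, ht0, hb2, hbR, hl0, hrr2, hrrC, hE, hin1, hin2, hin3, hin4⟩
    refine ⟨t, ⟨ht0, by omega⟩, l, ⟨hl0, by omega⟩, ?_, b, ⟨hb2, hbR⟩, rr, ⟨hrr2, hrrC⟩,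
      (isbdd_iff_edges g lc bg t l b rr ⟨hb2, hbR⟩ ⟨hrr2, hrrC⟩).mpr hE, ?_⟩
    · exact hE.1 l le_rfl (by omega)
    · exact ⟨(i:Int), ⟨by omega, by omega⟩, (j:Int), ⟨by omega, by omega⟩, by omega, by omega, hbg⟩

-- pointwise description of B's output comprehension
theorem b_out_char (g : List (List Int)) (P : Int → Int → Int → Bool) :
    ((PySem.List.enumerate g).map (fun p =>
      (PySem.List.enumerate p.2).map (fun q =>
        if P p.1 q.1 q.2 then 8 else q.2))).length = g.length ∧
    ∀ i : Nat, i < g.length →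
      (((PySem.List.enumerate g).map (fun p =>
        (PySem.List.enumerate p.2).map (fun q =>
          if P p.1 q.1 q.2 then 8 else q.2))).getD i []).length = (g.getD i []).length ∧
      ∀ j : Nat, j < (g.getD i []).length →
        ((((PySem.List.enumerate g).map (fun p =>
          (PySem.List.enumerate p.2).map (fun q =>
            if P p.1 q.1 q.2 then 8 else q.2))).getD i []).getD j 0) =
          if P i j ((g.getD i []).getD j 0) then 8 else (g.getD i []).getD j 0 := by
  have hlen : ((PySem.List.enumerate g).map (fun p =>
      (PySem.List.enumerate p.2).map (fun q =>
        if P p.1 q.1 q.2 then 8 else q.2))).length = g.length := by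
    rw [List.length_map, PySem.List.length_enumerate]
  refine ⟨hlen, ?_⟩
  intro i hi
  have hi' : i < ((PySem.List.enumerate g).map (fun p =>
      (PySem.List.enumerate p.2).map (fun q =>
        if P p.1 q.1 q.2 then 8 else q.2))).length := by omega
  have hie : i < (PySem.List.enumerate g 0).length := by
    rw [PySem.List.length_enumerate]; exact hi
  have hrowO : ((PySem.List.enumerate g).map (fun p =>
      (PySem.List.enumerate p.2).map (fun q =>
        if P p.1 q.1 q.2 then 8 else q.2))).getD i []
      = (PySem.List.enumerate (g[i]'hi)).map (fun q =>
          if P ((0:Int) + (i:Nat)) q.1 q.2 then 8 else q.2) := by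
    rw [List.getD_eq_getElem _ _ hi', List.getElem_map]
    rw [PySem.List.getElem_enumerate g 0 i hie]
  rw [hrowO]
  have hgrow : g.getD i [] = g[i]'hi := List.getD_eq_getElem _ _ hi
  constructor
  · rw [List.length_map, PySem.List.length_enumerate, hgrow]
  · intro j hj
    rw [hgrow] at hj
    have hj' : j < ((PySem.List.enumerate (g[i]'hi)).map (fun q =>
        if P ((0:Int) + (i:Nat)) q.1 q.2 then 8 else q.2)).length := by
      rw [List.length_map, PySem.List.length_enumerate]; exact hj
    have hje : j < (PySem.List.enumerate (g[i]'hi) 0).length := by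
      rw [PySem.List.length_enumerate]; exact hj
    rw [List.getD_eq_getElem _ _ hj', List.getElem_map,
      PySem.List.getElem_enumerate (g[i]'hi) 0 j hje]
    rw [hgrow, List.getD_eq_getElem _ _ hj]
    norm_num

theorem main_eq (g : List (List Int)) (lc bg : Int)
    (hrow : ∀ row ∈ g, (g.getD 0 []).length ≤ row.length) :
    AFold g lc bg = BOut g lc bg := by
  have HA := A_char g lc bg hrow
  have HB := b_out_char g (fun ri ci v => v == bg
    && decide (ci < PySem.List.len (PySem.List.pyGetD g 0 []))
    && decide (0 < gcell (BCover g lc bg) (ri + 1) (ci + 1)))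
  have hcols : PySem.List.len (PySem.List.pyGetD g 0 []) = ((g.getD 0 []).length : Int) :=
    len_pyGetD_zero g
  apply List.ext_getElem
  · rw [HA.1.1]
    exact (HB.1).symm
  · intro i h1 h2
    have hig : i < g.length := by rw [← HA.1.1]; exact h1
    apply List.ext_getElem
    · rw [← List.getD_eq_getElem _ _ h1, ← List.getD_eq_getElem _ _ h2, HA.1.2 i]
      exact (show ((BOut g lc bg).getD i []).length = (g.getD i []).length
        from (HB.2 i hig).1).symm
    · intro j hj1 hj2
      have hjg : j < (g.getD i []).length := by
        have hthis := HA.1.2 i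
        rw [List.getD_eq_getElem _ _ h1] at hthis
        omega
      rw [getElem2_eq_gN _ _ _ h1 hj1, getElem2_eq_gN _ _ _ h2 hj2, HA.2 i j]
      have hBcell := (HB.2 i hig).2 j hjg
      have hBcell' : gN (BOut g lc bg) i j =
          if ((g.getD i []).getD j 0 == bg
              && decide ((j:Int) < PySem.List.len (PySem.List.pyGetD g 0 []))
              && decide (0 < gcell (BCover g lc bg) ((i:Int) + 1) ((j:Int) + 1)))
          then 8 else (g.getD i []).getD j 0 := hBcell
      rw [hBcell']
      have hgn : (g.getD i []).getD j 0 = gN g i j := rfl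
      rw [hgn]
      have hiff := condA_iff' g lc bg hrow i j
      by_cases hjC : j < (g.getD 0 []).length
      · have hcov := bcover_pos_iff g lc bg hrow i j hig hjC
        by_cases hc : CondA g lc bg i j = true
        · rw [if_pos hc]
          obtain ⟨hbg2, hin⟩ := hiff.mp hc
          rw [if_pos]
          simp only [Bool.and_eq_true, beq_iff_eq, decide_eq_true_eq]
          exact ⟨⟨hbg2, by rw [hcols]; push_cast; omega⟩, hcov.mpr hin⟩
        · rw [if_neg hc, if_neg]
          simp only [Bool.and_eq_true, beq_iff_eq, decide_eq_true_eq]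
          rintro ⟨⟨hbg2, _⟩, hpos⟩
          exact hc (hiff.mpr ⟨hbg2, hcov.mp hpos⟩)
      · have hcnot : ¬ CondA g lc bg i j = true := by
          intro hc
          obtain ⟨_, t, b, l, rr, _, _, _, _, _, hrrC, _, _, _, _, hj4⟩ := hiff.mp hc
          rw [hcols] at hrrC
          omega
        rw [if_neg hcnot, if_neg]
        simp only [Bool.and_eq_true, beq_iff_eq, decide_eq_true_eq]
        rintro ⟨⟨_, hjlt⟩, _⟩
        rw [hcols] at hjlt
        omega

-- ===== VERDICT (by name: the statement is the Claim_ definition above) =====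
theorem transform_spec : Claim_equal_transform := by
  unfold Claim_equal_transform
  intro grid _hdom hpre
  unfold Spec_transform
  obtain ⟨hne, hdisj⟩ := hpre
  unfold transform transform_alt
  simp only [List.map_id']
  rw [foldl_break_find]
  cases hfind : (PySem.List.sorted (PySem.Dict.counter (grid.flatMap fun row => row)).items
      (fun p => p.2) true).find? (fun p => p.1 !=
        (PySem.List.pyGetD (PySem.List.sorted (PySem.Dict.counter (grid.flatMap fun row => row)).items
          (fun p => p.2) true) 0 ((0:Int), (0:Int))).1) with
  | none => rfl
  | some p =>
      have hrow : ∀ row ∈ grid, (grid.getD 0 []).length ≤ row.length := by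
        rcases hdisj with hmono | hr
        · exact absurd ((mono_find_none grid hne hmono).symm.trans hfind) (by simp)
        · exact hr
      exact main_eq grid p.1 _ hrow
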